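-- pv_equiv track=rewrite | github.com/adi271001/gfg-weekly-solutions | Week-92/Avoid-Fire.py | avoidFire
-- ===== SOURCE A (Python) =====
-- from collections import deque
--
-- def avoidFire(n, m, x, y, arr):
--     fire = [[10**9] * m for _ in range(n)]
--     dist = [[10**9] * m for _ in range(n)]
--     q = deque()
--
--     for i in range(n):
--         for j in range(m):
--             if arr[i][j] == 1:
--                 q.append([i,j])
--                 fire[i][j] = 0
--
--     if not q:
--         return 1
--
--     dx, dy = [1,0,-1,0], [0,1,0,-1]
--
--     while q:
--         xx, yy = q.popleft()
--         for i in range(4):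
--             nx, ny = xx + dx[i], yy + dy[i]
--             if 0 <= nx < n and 0 <= ny < m and fire[nx][ny] > 1 + fire[xx][yy]:
--                 fire[nx][ny] = 1 + fire[xx][yy]
--                 q.append([nx,ny])
--
--     dist[x][y] = 0
--     q.append([x,y])
--
--     while q:
--         xx, yy = q.popleft()
--         if fire[xx][yy] <= dist[xx][yy]:
--             continue
--         for i in range(4):
--             nx, ny = xx + dx[i], yy + dy[i]
--             if 0 <= nx < n and 0 <= ny < m and dist[nx][ny] > 1 + dist[xx][yy] and fire[nx][ny] > 1 + dist[xx][yy]: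
--                 dist[nx][ny] = 1 + dist[xx][yy]
--                 q.append([nx,ny])
--
--     return int(dist[n-1][m-1] != 1e9)
-- ===== SOURCE B (Python) =====
-- def avoidFire(n, m, x, y, arr):
--     fire = {(i, j) for i in range(n) for j in range(m) if arr[i][j] == 1}
--     if not fire:
--         return 1
--     if (x, y) == (n - 1, m - 1):
--         return 1
--     if (x, y) in fire:
--         return 0
--     burned = set(fire)
--     fire_front = fire
--     frontier = {(x, y)}
--     visited = {(x, y)}
--     while frontier:
--         new_burn = set()
--         for i, j in fire_front:
--             for a, b in ((i + 1, j), (i - 1, j), (i, j + 1), (i, j - 1)):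
--                 if 0 <= a < n and 0 <= b < m and (a, b) not in burned:
--                     burned.add((a, b))
--                     new_burn.add((a, b))
--         fire_front = new_burn
--         new_frontier = set()
--         for i, j in frontier:
--             for a, b in ((i + 1, j), (i - 1, j), (i, j + 1), (i, j - 1)):
--                 if 0 <= a < n and 0 <= b < m and (a, b) not in burned and (a, b) not in visited:
--                     visited.add((a, b))
--                     new_frontier.add((a, b))
--         if (n - 1, m - 1) in new_frontier:
--             return 1
--         frontier = new_frontier
--     return 0
-- ===== Notes on version B (the rewrite author's own statement) =====
-- stated objective: alternative
-- what changed: Replaces the two sequential distance-field BFS passes over 10^9-sentinel integer grids with a single interleaved time-stepped frontier simulation over coordinate sets: each tick the fire frontier burns one ring, then the player frontier expands into unburned unvisited cells, returning 1 as soon as the exit enters the player frontier and 0 when the frontier dies out.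
-- outside the precondition, e.g. on avoidFire(2, 2, -1, -1, [[1, 0], [0, 0]]): A returns 1, B returns 0
import Mathlib
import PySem

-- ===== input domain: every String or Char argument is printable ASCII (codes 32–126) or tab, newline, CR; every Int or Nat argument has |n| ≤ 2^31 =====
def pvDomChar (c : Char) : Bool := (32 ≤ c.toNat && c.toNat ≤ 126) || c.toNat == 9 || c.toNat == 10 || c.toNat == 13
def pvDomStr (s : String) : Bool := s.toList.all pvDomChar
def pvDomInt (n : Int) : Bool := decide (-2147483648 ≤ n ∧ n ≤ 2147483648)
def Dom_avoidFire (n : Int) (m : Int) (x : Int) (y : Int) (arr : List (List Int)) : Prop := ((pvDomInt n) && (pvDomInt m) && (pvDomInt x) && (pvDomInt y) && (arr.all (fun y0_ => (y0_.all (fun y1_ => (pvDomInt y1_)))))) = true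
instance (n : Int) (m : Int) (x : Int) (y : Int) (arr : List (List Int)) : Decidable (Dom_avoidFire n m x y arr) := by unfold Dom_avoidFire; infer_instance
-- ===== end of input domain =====

-- B replaces A's two sequential BFS distance fields (10^9-sentinel grids relaxed through one
-- deque) by a single interleaved time-stepped simulation on coordinate sets: each tick the fire
-- frontier burns one ring, then the player frontier expands into unburned, unvisited in-bounds
-- cells; 1 as soon as the exit enters the player frontier, 0 when the frontier dies out.

-- ===== PORT A =====
def afDirs : List (Int × Int) := [(1, 0), (0, 1), (-1, 0), (0, -1)]

-- arr[i][j] (indices are always in range under Pre_)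
def afGet (arr : List (List Int)) (i j : Int) : Int :=
  PySem.List.pyGetD (PySem.List.pyGetD arr i []) j 0

-- the two initialisation loops: collect burning cells into the queue, fire[i][j] = 0 there
def afInit (n m : Int) (arr : List (List Int)) :
    List (Int × Int) × ((Int × Int) → Int) :=
  (PySem.List.pyRange 0 n 1).foldl (fun st i =>
    (PySem.List.pyRange 0 m 1).foldl (fun st j =>
      if afGet arr i j = 1 then (st.1 ++ [(i, j)], Function.update st.2 (i, j) 0)
      else st) st)
    ([], fun _ => 1000000000)

-- body of the first while loop: relax the four neighbours of the popped cell
def afFireBody (n m : Int) (a : Int × Int)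
    (st : List (Int × Int) × ((Int × Int) → Int)) :
    List (Int × Int) × ((Int × Int) → Int) :=
  afDirs.foldl (fun st d =>
    let nb : Int × Int := (a.1 + d.1, a.2 + d.2)
    if 0 ≤ nb.1 ∧ nb.1 < n ∧ 0 ≤ nb.2 ∧ nb.2 < m ∧ st.2 nb > 1 + st.2 a then
      (st.1 ++ [nb], Function.update st.2 nb (1 + st.2 a))
    else st) st

-- first while loop (fire BFS); fuel only makes the recursion structural
def afFireLoop (n m : Int) : Nat → List (Int × Int) → ((Int × Int) → Int) → ((Int × Int) → Int)
  | 0, _, g => g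
  | _ + 1, [], g => g
  | fuel + 1, a :: rest, g =>
    let st := afFireBody n m a (rest, g)
    afFireLoop n m fuel st.1 st.2

-- body of the second while loop: relax neighbours subject to the fire deadline
def afDistBody (n m : Int) (g : (Int × Int) → Int) (a : Int × Int)
    (st : List (Int × Int) × ((Int × Int) → Int)) :
    List (Int × Int) × ((Int × Int) → Int) :=
  afDirs.foldl (fun st d =>
    let nb : Int × Int := (a.1 + d.1, a.2 + d.2)
    if 0 ≤ nb.1 ∧ nb.1 < n ∧ 0 ≤ nb.2 ∧ nb.2 < m ∧ st.2 nb > 1 + st.2 a ∧ g nb > 1 + st.2 a then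
      (st.1 ++ [nb], Function.update st.2 nb (1 + st.2 a))
    else st) st

-- second while loop (person BFS with `continue` when fire[xx][yy] <= dist[xx][yy])
def afDistLoop (n m : Int) (g : (Int × Int) → Int) :
    Nat → List (Int × Int) → ((Int × Int) → Int) → ((Int × Int) → Int)
  | 0, _, h => h
  | _ + 1, [], h => h
  | fuel + 1, a :: rest, h =>
    if g a ≤ h a then afDistLoop n m g fuel rest h
    else
      let st := afDistBody n m g a (rest, h)
      afDistLoop n m g fuel st.1 st.2

def avoidFire (n : Int) (m : Int) (x : Int) (y : Int) (arr : List (List Int)) : Int :=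
  let init := afInit n m arr
  if init.1 = [] then 1
  else
    let fuel := 2000000001 * (n.toNat * m.toNat) + 1
    let g := afFireLoop n m fuel init.1 init.2
    let h := afDistLoop n m g fuel [(x, y)] (Function.update (fun _ => 1000000000) (x, y) 0)
    if h (n - 1, m - 1) = 1000000000 then 0 else 1

-- ===== PORT B =====
def abDirs : List (Int × Int) := [(1, 0), (-1, 0), (0, 1), (0, -1)]

def abGet (arr : List (List Int)) (i j : Int) : Int :=
  PySem.List.pyGetD (PySem.List.pyGetD arr i []) j 0

-- {(i, j) for i in range(n) for j in range(m) if arr[i][j] == 1}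
def abFireSet (n m : Int) (arr : List (List Int)) : PySem.Set (Int × Int) :=
  (PySem.List.pyRange 0 n 1).foldl (fun s i =>
    (PySem.List.pyRange 0 m 1).foldl (fun s j =>
      if abGet arr i j = 1 then PySem.Set.add s (i, j) else s) s)
    PySem.Set.empty

-- one frontier sweep (shared shape of the fire sweep and the player sweep of a tick):
-- spread `front` to in-bounds neighbours passing `ok` and not yet in `seen`,
-- adding the fresh cells to both `seen` and `out`
def abTick (n m : Int) (ok : (Int × Int) → Bool) (front : List (Int × Int))
    (seen out : PySem.Set (Int × Int)) :
    PySem.Set (Int × Int) × PySem.Set (Int × Int) :=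
  front.foldl (fun st c =>
    abDirs.foldl (fun (st : PySem.Set (Int × Int) × PySem.Set (Int × Int)) d =>
      let nb : Int × Int := (c.1 + d.1, c.2 + d.2)
      if (0 ≤ nb.1 ∧ nb.1 < n ∧ 0 ≤ nb.2 ∧ nb.2 < m) ∧ ok nb = true ∧
          ¬ PySem.Set.contains st.1 nb = true then
        (PySem.Set.add st.1 nb, PySem.Set.add st.2 nb)
      else st) st) (seen, out)

-- the time-stepped main loop: fire ring first, then the player ring
def abLoop (n m : Int) :
    Nat → PySem.Set (Int × Int) → PySem.Set (Int × Int) → PySem.Set (Int × Int) →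
    PySem.Set (Int × Int) → Int
  | 0, _, _, _, _ => 0
  | fuel + 1, burned, ff, frontier, visited =>
    if frontier.isEmpty then 0
    else
      let ft := abTick n m (fun _ => true) ff burned PySem.Set.empty
      let pt := abTick n m (fun nb => ! PySem.Set.contains ft.1 nb) frontier visited PySem.Set.empty
      if PySem.Set.contains pt.2 (n - 1, m - 1) = true then 1
      else abLoop n m fuel ft.1 ft.2 pt.2 pt.1

def avoidFire_alt (n : Int) (m : Int) (x : Int) (y : Int) (arr : List (List Int)) : Int :=
  let fire := abFireSet n m arr
  if fire.isEmpty then 1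
  else if ((x, y) : Int × Int) = (n - 1, m - 1) then 1
  else if PySem.Set.contains fire (x, y) = true then 0
  else abLoop n m (n.toNat * m.toNat + 2) fire fire
    (PySem.Set.add PySem.Set.empty (x, y)) (PySem.Set.add PySem.Set.empty (x, y))

-- ===== PRECONDITION & SPEC =====
-- If n ≤ 0 or m ≤ 0 the scan is empty and A returns 1 touching nothing, so such inputs are
-- admitted unconditionally.  Otherwise Pre_ requires the scanned n×m region to exist inside arr
-- (outside that shape A raises IndexError); it bounds n*m below 10^9 because A's 10^9 sentinel
-- would collide with genuine travel distances on larger grids; and, unless the scanned region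
-- contains no 1 (in which case A returns 1 without ever touching x, y), it requires the start
-- cell to lie inside the grid, excluding Python's negative-index wraparound on x, y, which is
-- outside the task's natural domain.
def Pre_avoidFire (n : Int) (m : Int) (x : Int) (y : Int) (arr : List (List Int)) : Prop :=
  (n ≤ 0 ∨ m ≤ 0) ∨
  (0 < n ∧ 0 < m ∧ n * m < 1000000000 ∧
   n ≤ (arr.length : Int) ∧
   (∀ i : Nat, i < n.toNat → m ≤ ((arr.getD i []).length : Int)) ∧
   ((∀ i : Nat, i < n.toNat → ∀ j : Nat, j < m.toNat →
       PySem.List.pyGetD (PySem.List.pyGetD arr (i : Int) []) (j : Int) 0 ≠ 1) ∨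
    (0 ≤ x ∧ x < n ∧ 0 ≤ y ∧ y < m)))
instance (n : Int) (m : Int) (x : Int) (y : Int) (arr : List (List Int)) :
    Decidable (Pre_avoidFire n m x y arr) := by unfold Pre_avoidFire; infer_instance

def pvWitness_avoidFire : Int × Int × Int × Int × List (List Int) :=
  (2, 2, 0, 0, [[0, 0], [0, 1]])

def Spec_avoidFire (n : Int) (m : Int) (x : Int) (y : Int) (arr : List (List Int)) (out : Int) : Prop :=
  out = avoidFire_alt n m x y arr
instance (n : Int) (m : Int) (x : Int) (y : Int) (arr : List (List Int)) (out : Int) :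
    Decidable (Spec_avoidFire n m x y arr out) := by unfold Spec_avoidFire; infer_instance

-- ===== CLAIM (what is proved, stated in full; the proofs are below) =====
def Claim_equal_avoidFire : Prop := ∀ (n : Int) (m : Int) (x : Int) (y : Int) (arr : List (List Int)), Dom_avoidFire n m x y arr → Pre_avoidFire n m x y arr → Spec_avoidFire n m x y arr (avoidFire n m x y arr)

-- ===== LEMMAS AND PROOFS =====

-- ---------- spec layer: the mathematics both programs compute ----------

def afInb (n m : Int) (c : Int × Int) : Prop :=
  0 ≤ c.1 ∧ c.1 < n ∧ 0 ≤ c.2 ∧ c.2 < m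

def afAdj (a b : Int × Int) : Prop := ∃ d ∈ afDirs, b = (a.1 + d.1, a.2 + d.2)

def afSrc (n m : Int) (arr : List (List Int)) (c : Int × Int) : Prop :=
  afInb n m c ∧ afGet arr c.1 c.2 = 1

-- cells on fire within k time steps
def afF (n m : Int) (arr : List (List Int)) : Nat → (Int × Int) → Prop
  | 0 => afSrc n m arr
  | k + 1 => fun c => afF n m arr k c ∨ (afInb n m c ∧ ∃ a, afF n m arr k a ∧ afAdj a c)

-- the fire frontier: newly burned at time k
def afFFront (n m : Int) (arr : List (List Int)) (k : Nat) (c : Int × Int) : Prop :=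
  afF n m arr k c ∧ ∀ j, j < k → ¬ afF n m arr j c

-- positions the player can occupy at time k, arriving everywhere strictly before the fire
def afReach (n m x y : Int) (arr : List (List Int)) : Nat → (Int × Int) → Prop
  | 0 => fun c => c = (x, y)
  | k + 1 => fun c => afInb n m c ∧ ¬ afF n m arr (k + 1) c ∧
      ∃ a, afReach n m x y arr k a ∧ ¬ afF n m arr k a ∧ afAdj a c

-- (player frontier, player visited) of the pruned layered search
def afFV (n m x y : Int) (arr : List (List Int)) :
    Nat → (((Int × Int) → Prop) × ((Int × Int) → Prop))
  | 0 => (fun c => c = (x, y) ∧ ¬ afF n m arr 0 (x, y), fun c => c = (x, y))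
  | k + 1 =>
    (fun c => afInb n m c ∧ ¬ afF n m arr (k + 1) c ∧ ¬ (afFV n m x y arr k).2 c ∧
        ∃ a, (afFV n m x y arr k).1 a ∧ afAdj a c,
     fun c => (afFV n m x y arr k).2 c ∨
       (afInb n m c ∧ ¬ afF n m arr (k + 1) c ∧ ¬ (afFV n m x y arr k).2 c ∧
        ∃ a, (afFV n m x y arr k).1 a ∧ afAdj a c))

def afFrontier (n m x y : Int) (arr : List (List Int)) (k : Nat) (c : Int × Int) : Prop :=
  (afFV n m x y arr k).1 c

def afVisited (n m x y : Int) (arr : List (List Int)) (k : Nat) (c : Int × Int) : Prop :=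
  (afFV n m x y arr k).2 c

-- definitional unfoldings
lemma afF_succ (n m : Int) (arr : List (List Int)) (k : Nat) (c : Int × Int) :
    afF n m arr (k + 1) c ↔
      afF n m arr k c ∨ (afInb n m c ∧ ∃ a, afF n m arr k a ∧ afAdj a c) := Iff.rfl

lemma afReach_zero (n m x y : Int) (arr : List (List Int)) (c : Int × Int) :
    afReach n m x y arr 0 c ↔ c = (x, y) := Iff.rfl

lemma afReach_succ (n m x y : Int) (arr : List (List Int)) (k : Nat) (c : Int × Int) :
    afReach n m x y arr (k + 1) c ↔ afInb n m c ∧ ¬ afF n m arr (k + 1) c ∧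
      ∃ a, afReach n m x y arr k a ∧ ¬ afF n m arr k a ∧ afAdj a c := Iff.rfl

lemma afFrontier_zero (n m x y : Int) (arr : List (List Int)) (c : Int × Int) :
    afFrontier n m x y arr 0 c ↔ c = (x, y) ∧ ¬ afF n m arr 0 (x, y) := Iff.rfl

lemma afFrontier_succ (n m x y : Int) (arr : List (List Int)) (k : Nat) (c : Int × Int) :
    afFrontier n m x y arr (k + 1) c ↔
      afInb n m c ∧ ¬ afF n m arr (k + 1) c ∧ ¬ afVisited n m x y arr k c ∧
      ∃ a, afFrontier n m x y arr k a ∧ afAdj a c := Iff.rfl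

lemma afVisited_zero (n m x y : Int) (arr : List (List Int)) (c : Int × Int) :
    afVisited n m x y arr 0 c ↔ c = (x, y) := Iff.rfl

lemma afVisited_succ (n m x y : Int) (arr : List (List Int)) (k : Nat) (c : Int × Int) :
    afVisited n m x y arr (k + 1) c ↔
      afVisited n m x y arr k c ∨ afFrontier n m x y arr (k + 1) c := Iff.rfl

-- ---------- generic facts about the spec layer ----------

lemma afAdj_ne {a b : Int × Int} (h : afAdj a b) : b ≠ a := by
  rcases h with ⟨d, hd, rfl⟩
  simp only [afDirs, List.mem_cons, List.not_mem_nil, or_false] at hd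
  rcases hd with rfl | rfl | rfl | rfl <;>
    · intro h
      have h1 := congrArg Prod.fst h
      have h2 := congrArg Prod.snd h
      simp only [] at h1 h2
      omega

lemma afF_mono (n m : Int) (arr : List (List Int)) {j k : Nat} (hjk : j ≤ k)
    {c : Int × Int} (h : afF n m arr j c) : afF n m arr k c := by
  induction k with
  | zero =>
    have hj : j = 0 := by omega
    subst hj; exact h
  | succ k ih =>
    rcases Nat.lt_or_ge j (k + 1) with hlt | hge
    · exact (afF_succ n m arr k c).mpr (Or.inl (ih (by omega)))
    · have hj : j = k + 1 := by omega
      subst hj; exact h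

lemma afF_inb (n m : Int) (arr : List (List Int)) {k : Nat} {c : Int × Int}
    (h : afF n m arr k c) : afInb n m c := by
  induction k with
  | zero => exact h.1
  | succ k ih =>
    rcases (afF_succ n m arr k c).mp h with h | h
    · exact ih h
    · exact h.1

lemma afF_step_front (n m : Int) (arr : List (List Int)) (k : Nat) (c : Int × Int) :
    afF n m arr (k + 1) c ↔
      afF n m arr k c ∨ (afInb n m c ∧ ∃ a, afFFront n m arr k a ∧ afAdj a c) := by
  rw [afF_succ]
  constructor
  · intro h
    rcases h with h | ⟨hinb, a, ha, hadj⟩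
    · exact Or.inl h
    by_cases hc : afF n m arr k c
    · exact Or.inl hc
    refine Or.inr ⟨hinb, a, ⟨ha, ?_⟩, hadj⟩
    intro j hj haj
    exact hc (afF_mono n m arr (by omega)
      ((afF_succ n m arr j c).mpr (Or.inr ⟨hinb, a, haj, hadj⟩)))
  · intro h
    rcases h with h | ⟨hinb, a, ⟨ha, _⟩, hadj⟩
    · exact Or.inl h
    · exact Or.inr ⟨hinb, a, ha, hadj⟩

lemma afFFront_succ (n m : Int) (arr : List (List Int)) (k : Nat) (c : Int × Int) :
    afFFront n m arr (k + 1) c ↔ afF n m arr (k + 1) c ∧ ¬ afF n m arr k c := by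
  constructor
  · rintro ⟨h, hall⟩
    exact ⟨h, hall k (Nat.lt_succ_self k)⟩
  · rintro ⟨h1, h2⟩
    exact ⟨h1, fun j hj hc => h2 (afF_mono n m arr (by omega) hc)⟩

lemma afFrontier_notF (n m x y : Int) (arr : List (List Int)) {k : Nat} {c : Int × Int}
    (h : afFrontier n m x y arr k c) : ¬ afF n m arr k c := by
  cases k with
  | zero =>
    obtain ⟨hc, hn⟩ := (afFrontier_zero n m x y arr c).mp h
    rw [hc]; exact hn
  | succ k => exact ((afFrontier_succ n m x y arr k c).mp h).2.1

lemma afFrontier_start {n m x y : Int} {arr : List (List Int)} {c : Int × Int}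
    (h : afFrontier n m x y arr 0 c) : c = (x, y) :=
  ((afFrontier_zero n m x y arr c).mp h).1

lemma afFrontier_reach (n m x y : Int) (arr : List (List Int)) {k : Nat} {c : Int × Int}
    (h : afFrontier n m x y arr k c) : afReach n m x y arr k c := by
  induction k generalizing c with
  | zero => exact (afReach_zero n m x y arr c).mpr (afFrontier_start h)
  | succ k ih =>
    rcases (afFrontier_succ n m x y arr k c).mp h with ⟨hinb, hnf, _, a, hfa, hadj⟩
    exact (afReach_succ n m x y arr k c).mpr
      ⟨hinb, hnf, a, ih hfa, afFrontier_notF n m x y arr hfa, hadj⟩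

lemma afFrontier_visited (n m x y : Int) (arr : List (List Int)) {i p : Nat} {c : Int × Int}
    (h : afFrontier n m x y arr i c) (hip : i ≤ p) : afVisited n m x y arr p c := by
  induction p with
  | zero =>
    have hi : i = 0 := by omega
    subst hi
    exact (afVisited_zero n m x y arr c).mpr (afFrontier_start h)
  | succ p ih =>
    rcases Nat.lt_or_ge i (p + 1) with hlt | hge
    · exact (afVisited_succ n m x y arr p c).mpr (Or.inl (ih (by omega)))
    · have hi : i = p + 1 := by omega
      subst hi
      exact (afVisited_succ n m x y arr p c).mpr (Or.inr h)

lemma afVisited_iff (n m x y : Int) (arr : List (List Int))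
    (hs : ¬ afF n m arr 0 (x, y)) (k : Nat) (c : Int × Int) :
    afVisited n m x y arr k c ↔ ∃ j, j ≤ k ∧ afFrontier n m x y arr j c := by
  induction k with
  | zero =>
    rw [afVisited_zero]
    constructor
    · intro h
      exact ⟨0, le_refl 0, (afFrontier_zero n m x y arr c).mpr ⟨h, hs⟩⟩
    · rintro ⟨j, hj, hf⟩
      have hj0 : j = 0 := by omega
      subst hj0
      exact afFrontier_start hf
  | succ k ih =>
    rw [afVisited_succ]
    constructor
    · intro h
      rcases h with h | h
      · rcases ih.mp h with ⟨j, hj, hf⟩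
        exact ⟨j, by omega, hf⟩
      · exact ⟨k + 1, le_refl _, h⟩
    · rintro ⟨j, hj, hf⟩
      rcases Nat.lt_or_ge j (k + 1) with hlt | hge
      · exact Or.inl (ih.mpr ⟨j, by omega, hf⟩)
      · have hj1 : j = k + 1 := by omega
        subst hj1
        exact Or.inr hf

lemma afFrontier_empty_mono (n m x y : Int) (arr : List (List Int)) {k j : Nat}
    (h : ∀ c, ¬ afFrontier n m x y arr k c) (hkj : k < j) :
    ∀ c, ¬ afFrontier n m x y arr j c := by
  induction j with
  | zero => omega
  | succ j ih =>
    rcases Nat.lt_or_ge k j with hlt | hge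
    · intro c hc
      rcases ((afFrontier_succ n m x y arr j c).mp hc) with ⟨_, _, _, a, hfa, _⟩
      exact ih hlt a hfa
    · have hk : k = j := by omega
      subst hk
      intro c hc
      rcases ((afFrontier_succ n m x y arr k c).mp hc) with ⟨_, _, _, a, hfa, _⟩
      exact h a hfa

lemma afReach_frontier (n m x y : Int) (arr : List (List Int))
    (hs : ¬ afF n m arr 0 (x, y)) {k : Nat} {c : Int × Int}
    (h : afReach n m x y arr k c) : ∃ j, j ≤ k ∧ afFrontier n m x y arr j c := by
  induction k generalizing c with
  | zero =>
    have hc := (afReach_zero n m x y arr c).mp h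
    exact ⟨0, le_refl 0, (afFrontier_zero n m x y arr c).mpr ⟨hc, hs⟩⟩
  | succ k ih =>
    rcases (afReach_succ n m x y arr k c).mp h with ⟨hinb, hnf, a, hra, hnfa, hadj⟩
    rcases ih hra with ⟨j, hjk, hfa⟩
    by_cases hv : afVisited n m x y arr j c
    · rcases (afVisited_iff n m x y arr hs j c).mp hv with ⟨j', hj', hf'⟩
      exact ⟨j', by omega, hf'⟩
    · refine ⟨j + 1, by omega, (afFrontier_succ n m x y arr j c).mpr
        ⟨hinb, ?_, hv, a, hfa, hadj⟩⟩
      intro hfc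
      exact hnf (afF_mono n m arr (by omega) hfc)

lemma afFrontier_inb (n m x y : Int) (arr : List (List Int))
    (hs : afInb n m (x, y)) {k : Nat} {c : Int × Int}
    (h : afFrontier n m x y arr k c) : afInb n m c := by
  cases k with
  | zero => rw [afFrontier_start h]; exact hs
  | succ k => exact ((afFrontier_succ n m x y arr k c).mp h).1

lemma afReach_inb (n m x y : Int) (arr : List (List Int))
    (hs : afInb n m (x, y)) {k : Nat} {c : Int × Int}
    (h : afReach n m x y arr k c) : afInb n m c := by
  cases k with
  | zero => rw [(afReach_zero n m x y arr c).mp h]; exact hs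
  | succ k => exact ((afReach_succ n m x y arr k c).mp h).1

lemma afFrontier_card (n m x y : Int) (arr : List (List Int))
    (hs : afInb n m (x, y)) {j : Nat} {c : Int × Int}
    (h : afFrontier n m x y arr j c) : j < n.toNat * m.toNat := by
  classical
  have step : ∀ i, (∃ a, afFrontier n m x y arr (i + 1) a) →
      ∃ a, afFrontier n m x y arr i a := by
    rintro i ⟨a, ha⟩
    rcases ((afFrontier_succ n m x y arr i a).mp ha) with ⟨_, _, _, b, hfb, _⟩
    exact ⟨b, hfb⟩
  have hne : ∀ d i, i + d = j → ∃ a, afFrontier n m x y arr i a := by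
    intro d
    induction d with
    | zero =>
      intro i hi
      have : i = j := by omega
      subst this
      exact ⟨c, h⟩
    | succ d ih =>
      intro i hi
      exact step i (ih (i + 1) (by omega))
  have hne' : ∀ i, i ≤ j → ∃ a, afFrontier n m x y arr i a :=
    fun i hi => hne (j - i) i (by omega)
  let w : Nat → Int × Int := fun i =>
    if hi : i ≤ j then Classical.choose (hne' i hi) else (0, 0)
  have hwf : ∀ i, i ≤ j → afFrontier n m x y arr i (w i) := by
    intro i hi
    simp only [w, dif_pos hi]
    exact Classical.choose_spec (hne' i hi)
  have key : ∀ i1 i2, i1 < i2 → i2 ≤ j → w i1 ≠ w i2 := by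
    intro i1 i2 hlt hle heq
    obtain ⟨i2', rfl⟩ : ∃ i2', i2 = i2' + 1 := ⟨i2 - 1, by omega⟩
    have hf2 := hwf _ hle
    have hnv := ((afFrontier_succ n m x y arr i2' (w (i2' + 1))).mp hf2).2.2.1
    apply hnv
    rw [← heq]
    exact afFrontier_visited n m x y arr (hwf i1 (by omega)) (by omega)
  have hmaps : ∀ i ∈ Finset.range (j + 1),
      w i ∈ (Finset.Ico (0 : Int) n ×ˢ Finset.Ico (0 : Int) m) := by
    intro i hi
    rw [Finset.mem_range] at hi
    rcases afFrontier_inb n m x y arr hs (hwf i (by omega)) with ⟨h1, h2, h3, h4⟩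
    rw [Finset.mem_product, Finset.mem_Ico, Finset.mem_Ico]
    exact ⟨⟨h1, h2⟩, ⟨h3, h4⟩⟩
  have hinj : Set.InjOn w ↑(Finset.range (j + 1)) := by
    intro i1 h1 i2 h2 heq
    simp only [Finset.coe_range, Set.mem_Iio] at h1 h2
    rcases Nat.lt_trichotomy i1 i2 with hlt | heq' | hlt
    · exact absurd heq (key i1 i2 hlt (by omega))
    · exact heq'
    · exact absurd heq.symm (key i2 i1 hlt (by omega))
  have hcard := Finset.card_le_card_of_injOn w hmaps hinj
  rw [Finset.card_range, Finset.card_product] at hcard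
  rw [Int.card_Ico, Int.card_Ico] at hcard
  simp only [sub_zero] at hcard
  omega

lemma afReach_start_burned (n m x y : Int) (arr : List (List Int))
    (hs : afF n m arr 0 (x, y)) {k : Nat} {c : Int × Int}
    (h : afReach n m x y arr k c) : c = (x, y) := by
  induction k generalizing c with
  | zero => exact (afReach_zero n m x y arr c).mp h
  | succ k ih =>
    rcases (afReach_succ n m x y arr k c).mp h with ⟨_, _, a, hra, hnfa, _⟩
    have ha := ih hra
    rw [ha] at hnfa
    exact absurd (afF_mono n m arr (Nat.zero_le k) hs) hnfa

-- length of a nodup list of in-bounds cells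
lemma af_nodup_inb_len (n m : Int) (l : List (Int × Int)) (hn : l.Nodup)
    (hi : ∀ c ∈ l, afInb n m c) : l.length ≤ n.toNat * m.toNat := by
  classical
  have h1 : l.toFinset ⊆ Finset.Ico (0 : Int) n ×ˢ Finset.Ico (0 : Int) m := by
    intro c hc
    rw [List.mem_toFinset] at hc
    rcases hi c hc with ⟨a1, a2, a3, a4⟩
    rw [Finset.mem_product, Finset.mem_Ico, Finset.mem_Ico]
    exact ⟨⟨a1, a2⟩, ⟨a3, a4⟩⟩
  have h2 := Finset.card_le_card h1
  rw [List.toFinset_card_of_nodup hn, Finset.card_product, Int.card_Ico, Int.card_Ico] at h2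
  simp only [sub_zero] at h2
  omega

-- ---------- invariants of port A's loops ----------

def afInv2 (n m : Int) (arr : List (List Int)) (g : (Int × Int) → Int) : Prop :=
  (∀ c, 0 ≤ g c ∧ g c ≤ 1000000000) ∧
  (∀ c, afSrc n m arr c → g c = 0) ∧
  (∀ c, g c = 1000000000 ∨ afF n m arr (g c).toNat c)

def afFireInv (n m : Int) (arr : List (List Int)) (q : List (Int × Int))
    (g : (Int × Int) → Int) : Prop :=
  afInv2 n m arr g ∧
  ∀ a, afInb n m a → a ∈ q ∨ ∀ b, afAdj a b → afInb n m b → g b ≤ 1 + g a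

noncomputable def afPhi (n m : Int) (g : (Int × Int) → Int) : Nat :=
  2 * ∑ c ∈ (Finset.Ico (0 : Int) n ×ˢ Finset.Ico (0 : Int) m), (g c).toNat

-- g is exactly (fire-arrival time, capped at 10^9)
def afGoodFire (n m : Int) (arr : List (List Int)) (g : (Int × Int) → Int) : Prop :=
  (∀ c, 0 ≤ g c ∧ g c ≤ 1000000000) ∧
  ∀ (c : Int × Int) (k : Nat), (k : Int) < 1000000000 → (g c ≤ (k : Int) ↔ afF n m arr k c)

def afDistInv (n m x y : Int) (arr : List (List Int)) (g : (Int × Int) → Int)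
    (q : List (Int × Int)) (h : (Int × Int) → Int) : Prop :=
  (∀ c, 0 ≤ h c ∧ h c ≤ 1000000000) ∧
  (∀ c, h c = 1000000000 ∨ afReach n m x y arr (h c).toNat c) ∧
  ∀ a, afInb n m a → a ∈ q ∨ g a ≤ h a ∨
    ∀ b, afAdj a b → afInb n m b → (h b ≤ 1 + h a ∨ g b ≤ 1 + h a)

-- one Phi-decreasing update
lemma afPhi_update (n m : Int) (g : (Int × Int) → Int) (b : Int × Int)
    (hb : afInb n m b) (v : Int) (h0 : 0 ≤ v) (hlt : v < g b) :
    afPhi n m (Function.update g b v) + 2 ≤ afPhi n m g := by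
  classical
  have hmem : b ∈ (Finset.Ico (0 : Int) n ×ˢ Finset.Ico (0 : Int) m) := by
    rcases hb with ⟨h1, h2, h3, h4⟩
    rw [Finset.mem_product, Finset.mem_Ico, Finset.mem_Ico]
    exact ⟨⟨h1, h2⟩, ⟨h3, h4⟩⟩
  unfold afPhi
  rw [← Finset.add_sum_erase _ _ hmem, ← Finset.add_sum_erase _ (fun c => (g c).toNat) hmem]
  have heq : ∑ c ∈ (Finset.Ico (0 : Int) n ×ˢ Finset.Ico (0 : Int) m).erase b,
      (Function.update g b v c).toNat =
      ∑ c ∈ (Finset.Ico (0 : Int) n ×ˢ Finset.Ico (0 : Int) m).erase b, (g c).toNat := by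
    apply Finset.sum_congr rfl
    intro c hc
    rw [Function.update_of_ne (Finset.ne_of_mem_erase hc)]
  rw [heq, Function.update_self]
  omega

-- ---------- port A: initialisation ----------

lemma afInitRow_spec (m : Int) (arr : List (List Int)) (i : Int) (js : List Int)
    (st : List (Int × Int) × ((Int × Int) → Int)) :
    (∀ c, c ∈ (js.foldl (fun st j =>
        if afGet arr i j = 1 then (st.1 ++ [(i, j)], Function.update st.2 (i, j) 0)
        else st) st).1 ↔
      c ∈ st.1 ∨ (c.1 = i ∧ c.2 ∈ js ∧ afGet arr i c.2 = 1)) ∧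
    (∀ c, ((c.1 = i ∧ c.2 ∈ js ∧ afGet arr i c.2 = 1) →
        (js.foldl (fun st j =>
          if afGet arr i j = 1 then (st.1 ++ [(i, j)], Function.update st.2 (i, j) 0)
          else st) st).2 c = 0) ∧
      (¬ (c.1 = i ∧ c.2 ∈ js ∧ afGet arr i c.2 = 1) →
        (js.foldl (fun st j =>
          if afGet arr i j = 1 then (st.1 ++ [(i, j)], Function.update st.2 (i, j) 0)
          else st) st).2 c = st.2 c)) ∧
    (js.foldl (fun st j =>
        if afGet arr i j = 1 then (st.1 ++ [(i, j)], Function.update st.2 (i, j) 0)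
        else st) st).1.length ≤ st.1.length + js.length := by
  induction js generalizing st with
  | nil =>
    refine ⟨fun c => ?_, fun c => ⟨fun hc => ?_, fun _ => rfl⟩, by simp⟩
    · simp
    · rcases hc with ⟨_, h2, _⟩
      simp at h2
  | cons j js ih =>
    simp only [List.foldl_cons]
    by_cases hj : afGet arr i j = 1
    · rw [if_pos hj]
      obtain ⟨ihm, ihv, ihl⟩ := ih (st.1 ++ [(i, j)], Function.update st.2 (i, j) 0)
      refine ⟨fun c => ?_, fun c => ⟨fun hc => ?_, fun hc => ?_⟩, ?_⟩
      · rw [ihm c]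
        simp only [List.mem_append, List.mem_cons, List.not_mem_nil, or_false]
        constructor
        · rintro ((hc | hc) | ⟨h1, h2, h3⟩)
          · exact Or.inl hc
          · exact Or.inr ⟨by rw [hc], Or.inl (by rw [hc]), by rw [hc]; exact hj⟩
          · exact Or.inr ⟨h1, Or.inr h2, h3⟩
        · rintro (hc | ⟨h1, h2 | h2, h3⟩)
          · exact Or.inl (Or.inl hc)
          · refine Or.inl (Or.inr ?_)
            rw [Prod.ext_iff]
            exact ⟨h1, h2⟩
          · exact Or.inr ⟨h1, h2, h3⟩
      · rcases hc with ⟨h1, h2, h3⟩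
        rw [List.mem_cons] at h2
        by_cases hmem : c.2 ∈ js
        · exact (ihv c).1 ⟨h1, hmem, h3⟩
        · have h2' : c.2 = j := by tauto
          have hceq : c = (i, j) := by
            rw [Prod.ext_iff]
            exact ⟨h1, h2'⟩
          rw [(ihv c).2 (by intro hx; exact hmem hx.2.1), hceq]
          show Function.update st.2 (i, j) 0 (i, j) = 0
          rw [Function.update_self]
      · rw [(ihv c).2 (by
          intro hx
          exact hc ⟨hx.1, List.mem_cons_of_mem j hx.2.1, hx.2.2⟩)]
        have hne : c ≠ (i, j) := by
          intro hceq
          exact hc ⟨by rw [hceq], by rw [hceq]; exact List.mem_cons_self, by rw [hceq]; exact hj⟩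
        exact Function.update_of_ne hne _ _
      · refine le_trans ihl ?_
        have hlen1 : (st.1 ++ [(i, j)], Function.update st.2 (i, j) 0).1.length =
            st.1.length + 1 := by
          simp
        rw [hlen1]
        simp only [List.length_cons]
        omega
    · rw [if_neg hj]
      obtain ⟨ihm, ihv, ihl⟩ := ih st
      refine ⟨fun c => ?_, fun c => ⟨fun hc => ?_, fun hc => ?_⟩, ?_⟩
      · rw [ihm c]
        simp only [List.mem_cons]
        constructor
        · rintro (hc | ⟨h1, h2, h3⟩)
          · exact Or.inl hc
          · exact Or.inr ⟨h1, Or.inr h2, h3⟩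
        · rintro (hc | ⟨h1, h2 | h2, h3⟩)
          · exact Or.inl hc
          · rw [h2] at h3
            exact absurd h3 hj
          · exact Or.inr ⟨h1, h2, h3⟩
      · rcases hc with ⟨h1, h2, h3⟩
        rw [List.mem_cons] at h2
        rcases h2 with h2 | h2
        · rw [h2] at h3
          exact absurd h3 hj
        · exact (ihv c).1 ⟨h1, h2, h3⟩
      · exact (ihv c).2 (by
          intro hx
          exact hc ⟨hx.1, List.mem_cons_of_mem j hx.2.1, hx.2.2⟩)
      · refine le_trans ihl ?_
        simp only [List.length_cons]
        omega

lemma afInitAll_spec (m : Int) (arr : List (List Int)) (is : List Int)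
    (st : List (Int × Int) × ((Int × Int) → Int)) :
    (∀ c, c ∈ (is.foldl (fun st i => (PySem.List.pyRange 0 m 1).foldl (fun st j =>
        if afGet arr i j = 1 then (st.1 ++ [(i, j)], Function.update st.2 (i, j) 0)
        else st) st) st).1 ↔
      c ∈ st.1 ∨ (c.1 ∈ is ∧ 0 ≤ c.2 ∧ c.2 < m ∧ afGet arr c.1 c.2 = 1)) ∧
    (∀ c, ((c.1 ∈ is ∧ 0 ≤ c.2 ∧ c.2 < m ∧ afGet arr c.1 c.2 = 1) →
        (is.foldl (fun st i => (PySem.List.pyRange 0 m 1).foldl (fun st j =>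
          if afGet arr i j = 1 then (st.1 ++ [(i, j)], Function.update st.2 (i, j) 0)
          else st) st) st).2 c = 0) ∧
      (¬ (c.1 ∈ is ∧ 0 ≤ c.2 ∧ c.2 < m ∧ afGet arr c.1 c.2 = 1) →
        (is.foldl (fun st i => (PySem.List.pyRange 0 m 1).foldl (fun st j =>
          if afGet arr i j = 1 then (st.1 ++ [(i, j)], Function.update st.2 (i, j) 0)
          else st) st) st).2 c = st.2 c)) ∧
    (is.foldl (fun st i => (PySem.List.pyRange 0 m 1).foldl (fun st j =>
        if afGet arr i j = 1 then (st.1 ++ [(i, j)], Function.update st.2 (i, j) 0)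
        else st) st) st).1.length ≤ st.1.length + is.length * m.toNat := by
  induction is generalizing st with
  | nil =>
    refine ⟨fun c => ?_, fun c => ⟨fun hc => ?_, fun _ => rfl⟩, by simp⟩
    · simp
    · rcases hc with ⟨h1, _⟩
      simp at h1
  | cons i is ih =>
    simp only [List.foldl_cons]
    obtain ⟨rm, rv, rl⟩ := afInitRow_spec m arr i (PySem.List.pyRange 0 m 1) st
    obtain ⟨ihm, ihv, ihl⟩ := ih ((PySem.List.pyRange 0 m 1).foldl (fun st j =>
      if afGet arr i j = 1 then (st.1 ++ [(i, j)], Function.update st.2 (i, j) 0)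
      else st) st)
    have hrow : ∀ c : Int × Int,
        (c.1 = i ∧ c.2 ∈ PySem.List.pyRange 0 m 1 ∧ afGet arr i c.2 = 1) ↔
        (c.1 = i ∧ 0 ≤ c.2 ∧ c.2 < m ∧ afGet arr c.1 c.2 = 1) := by
      intro c
      rw [PySem.List.mem_pyRange_one]
      constructor
      · rintro ⟨h1, ⟨h2a, h2b⟩, h3⟩
        exact ⟨h1, h2a, h2b, by rw [h1]; exact h3⟩
      · rintro ⟨h1, h2a, h2b, h3⟩
        exact ⟨h1, ⟨h2a, h2b⟩, by rw [← h1]; exact h3⟩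
    refine ⟨fun c => ?_, fun c => ⟨fun hc => ?_, fun hc => ?_⟩, ?_⟩
    · rw [ihm c, rm c]
      simp only [List.mem_cons]
      constructor
      · rintro ((hc | hc) | ⟨h1, h2, h3⟩)
        · exact Or.inl hc
        · rcases (hrow c).mp hc with ⟨h1, h2, h3, h4⟩
          exact Or.inr ⟨Or.inl h1, h2, h3, h4⟩
        · exact Or.inr ⟨Or.inr h1, h2, h3⟩
      · rintro (hc | ⟨h1 | h1, h2, h3, h4⟩)
        · exact Or.inl (Or.inl hc)
        · exact Or.inl (Or.inr ((hrow c).mpr ⟨h1, h2, h3, h4⟩))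
        · exact Or.inr ⟨h1, h2, h3, h4⟩
    · rcases hc with ⟨h1, h2, h3, h4⟩
      rw [List.mem_cons] at h1
      rcases h1 with h1 | h1
      · by_cases hin : c.1 ∈ is ∧ 0 ≤ c.2 ∧ c.2 < m ∧ afGet arr c.1 c.2 = 1
        · exact (ihv c).1 hin
        · rw [(ihv c).2 hin]
          exact (rv c).1 ((hrow c).mpr ⟨h1, h2, h3, h4⟩)
      · exact (ihv c).1 ⟨h1, h2, h3, h4⟩
    · have hc1 : ¬ (c.1 ∈ is ∧ 0 ≤ c.2 ∧ c.2 < m ∧ afGet arr c.1 c.2 = 1) := by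
        intro hx
        exact hc ⟨List.mem_cons_of_mem i hx.1, hx.2⟩
      rw [(ihv c).2 hc1]
      refine (rv c).2 ?_
      intro hx
      rcases (hrow c).mp hx with ⟨h1, h2, h3, h4⟩
      exact hc ⟨by rw [List.mem_cons]; exact Or.inl h1, h2, h3, h4⟩
    · have hl2 := rl
      rw [PySem.List.length_pyRange_one] at hl2
      have hm0 : (m - 0).toNat = m.toNat := by omega
      rw [hm0] at hl2
      refine le_trans ihl ?_
      simp only [List.length_cons, Nat.add_mul, one_mul]
      omega

lemma af_src_iff (n m : Int) (arr : List (List Int)) (c : Int × Int) :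
    (c.1 ∈ PySem.List.pyRange 0 n 1 ∧ 0 ≤ c.2 ∧ c.2 < m ∧ afGet arr c.1 c.2 = 1) ↔
      afSrc n m arr c := by
  rw [PySem.List.mem_pyRange_one]
  unfold afSrc afInb
  tauto

lemma afInit_mem (n m : Int) (arr : List (List Int)) (c : Int × Int) :
    c ∈ (afInit n m arr).1 ↔ afSrc n m arr c := by
  unfold afInit
  rw [(afInitAll_spec m arr (PySem.List.pyRange 0 n 1) ([], fun _ => 1000000000)).1 c]
  rw [af_src_iff n m arr c]
  simp

lemma afInit_g (n m : Int) (arr : List (List Int)) (c : Int × Int) :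
    (afSrc n m arr c → (afInit n m arr).2 c = 0) ∧
    (¬ afSrc n m arr c → (afInit n m arr).2 c = 1000000000) := by
  unfold afInit
  obtain ⟨_, hv, _⟩ := afInitAll_spec m arr (PySem.List.pyRange 0 n 1) ([], fun _ => 1000000000)
  constructor
  · intro hc
    exact (hv c).1 ((af_src_iff n m arr c).mpr hc)
  · intro hc
    exact (hv c).2 (fun hx => hc ((af_src_iff n m arr c).mp hx))

lemma afInit_len (n m : Int) (arr : List (List Int)) :
    (afInit n m arr).1.length ≤ n.toNat * m.toNat := by
  unfold afInit
  have h := (afInitAll_spec m arr (PySem.List.pyRange 0 n 1) ([], fun _ => 1000000000)).2.2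
  rw [PySem.List.length_pyRange_one] at h
  simp only [List.length_nil] at h
  have hn0 : (n - 0).toNat = n.toNat := by omega
  rw [hn0] at h
  omega

-- ---------- port A: fire loop ----------

-- the fold step of afFireBody, named for the proofs
def afFStep (n m : Int) (a : Int × Int)
    (st : List (Int × Int) × ((Int × Int) → Int)) (d : Int × Int) :
    List (Int × Int) × ((Int × Int) → Int) :=
  if 0 ≤ a.1 + d.1 ∧ a.1 + d.1 < n ∧ 0 ≤ a.2 + d.2 ∧ a.2 + d.2 < m ∧
      st.2 (a.1 + d.1, a.2 + d.2) > 1 + st.2 a then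
    (st.1 ++ [(a.1 + d.1, a.2 + d.2)], Function.update st.2 (a.1 + d.1, a.2 + d.2) (1 + st.2 a))
  else st

lemma afFireBody_eq (n m : Int) (a : Int × Int)
    (st : List (Int × Int) × ((Int × Int) → Int)) :
    afFireBody n m a st = afDirs.foldl (afFStep n m a) st := rfl

lemma afFireBody_spec (n m : Int) (arr : List (List Int)) (a : Int × Int)
    (ds : List (Int × Int)) (hds : ∀ d ∈ ds, d ∈ afDirs)
    (q : List (Int × Int)) (g : (Int × Int) → Int) (hI : afInv2 n m arr g) :
    (∀ c, (ds.foldl (afFStep n m a) (q, g)).2 c ≤ g c) ∧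
    afInv2 n m arr (ds.foldl (afFStep n m a) (q, g)).2 ∧
    (∀ c, c ∈ q → c ∈ (ds.foldl (afFStep n m a) (q, g)).1) ∧
    (∀ c, (ds.foldl (afFStep n m a) (q, g)).2 c ≠ g c →
      c ∈ (ds.foldl (afFStep n m a) (q, g)).1) ∧
    ((ds.foldl (afFStep n m a) (q, g)).2 a = g a) ∧
    (∀ d ∈ ds, afInb n m (a.1 + d.1, a.2 + d.2) →
      (ds.foldl (afFStep n m a) (q, g)).2 (a.1 + d.1, a.2 + d.2) ≤ 1 + g a) ∧
    afPhi n m (ds.foldl (afFStep n m a) (q, g)).2 +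
      (ds.foldl (afFStep n m a) (q, g)).1.length ≤ afPhi n m g + q.length := by
  induction ds generalizing q g with
  | nil =>
    refine ⟨fun c => le_refl _, hI, fun c hc => hc, fun c hc => absurd rfl hc, rfl, ?_, le_refl _⟩
    intro d hd
    exact absurd hd (List.not_mem_nil)
  | cons d rest ih =>
    have hd0 : d ∈ afDirs := hds d (by simp)
    have hrest : ∀ d' ∈ rest, d' ∈ afDirs := fun d' hd' => hds d' (by simp [hd'])
    have hadj : afAdj a (a.1 + d.1, a.2 + d.2) := ⟨d, hd0, rfl⟩
    have hne : (a.1 + d.1, a.2 + d.2) ≠ a := afAdj_ne hadj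
    simp only [List.foldl_cons]
    by_cases hcond : 0 ≤ a.1 + d.1 ∧ a.1 + d.1 < n ∧ 0 ≤ a.2 + d.2 ∧ a.2 + d.2 < m ∧
        g (a.1 + d.1, a.2 + d.2) > 1 + g a
    · have hstep : afFStep n m a (q, g) d =
          (q ++ [(a.1 + d.1, a.2 + d.2)],
           Function.update g (a.1 + d.1, a.2 + d.2) (1 + g a)) := by
        unfold afFStep
        rw [if_pos hcond]
      rw [hstep]
      have hinb : afInb n m (a.1 + d.1, a.2 + d.2) :=
        ⟨hcond.1, hcond.2.1, hcond.2.2.1, hcond.2.2.2.1⟩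
      have hga0 := (hI.1 a).1
      have hgaE := (hI.1 a).2
      have hnbE := (hI.1 (a.1 + d.1, a.2 + d.2)).2
      have hgt := hcond.2.2.2.2
      have hI' : afInv2 n m arr (Function.update g (a.1 + d.1, a.2 + d.2) (1 + g a)) := by
        refine ⟨fun c => ?_, fun c hc => ?_, fun c => ?_⟩
        · by_cases hcc : c = (a.1 + d.1, a.2 + d.2)
          · rw [hcc, Function.update_self]
            omega
          · rw [Function.update_of_ne hcc]
            exact hI.1 c
        · by_cases hcc : c = (a.1 + d.1, a.2 + d.2)
          · exfalso
            have h0 := hI.2.1 c hc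
            rw [hcc] at h0
            omega
          · rw [Function.update_of_ne hcc]
            exact hI.2.1 c hc
        · by_cases hcc : c = (a.1 + d.1, a.2 + d.2)
          · subst hcc
            rw [Function.update_self]
            right
            have hgaNE : g a ≠ 1000000000 := by omega
            rcases hI.2.2 a with hE | hFa
            · exact absurd hE hgaNE
            · have htn : (1 + g a).toNat = (g a).toNat + 1 := by omega
              rw [htn]
              exact (afF_succ n m arr _ _).mpr (Or.inr ⟨hinb, a, hFa, hadj⟩)
          · rw [Function.update_of_ne hcc]
            exact hI.2.2 c
      obtain ⟨s1, s2, s3, s4, s5, s6, s7⟩ :=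
        ih hrest (q ++ [(a.1 + d.1, a.2 + d.2)])
          (Function.update g (a.1 + d.1, a.2 + d.2) (1 + g a)) hI'
      have hupd_le : ∀ c, Function.update g (a.1 + d.1, a.2 + d.2) (1 + g a) c ≤ g c := by
        intro c
        by_cases hcc : c = (a.1 + d.1, a.2 + d.2)
        · rw [hcc, Function.update_self]
          omega
        · rw [Function.update_of_ne hcc]
      have hupd_a : Function.update g (a.1 + d.1, a.2 + d.2) (1 + g a) a = g a :=
        Function.update_of_ne (Ne.symm hne) _ _
      refine ⟨fun c => le_trans (s1 c) (hupd_le c), s2, ?_, ?_, ?_, ?_, ?_⟩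
      · intro c hc
        exact s3 c (by simp [hc])
      · intro c hc
        by_cases hcu : (rest.foldl (afFStep n m a)
            (q ++ [(a.1 + d.1, a.2 + d.2)],
             Function.update g (a.1 + d.1, a.2 + d.2) (1 + g a))).2 c =
            Function.update g (a.1 + d.1, a.2 + d.2) (1 + g a) c
        · have hcne : Function.update g (a.1 + d.1, a.2 + d.2) (1 + g a) c ≠ g c := by
            rw [← hcu]
            exact hc
          have hceq : c = (a.1 + d.1, a.2 + d.2) := by
            by_contra hx
            rw [Function.update_of_ne hx] at hcne
            exact hcne rfl
          exact s3 c (by simp [hceq])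
        · exact s4 c hcu
      · rw [s5, hupd_a]
      · intro d' hd' hinb'
        rw [List.mem_cons] at hd'
        rcases hd' with rfl | hd'
        · have h1 := s1 (a.1 + d'.1, a.2 + d'.2)
          rw [Function.update_self] at h1
          exact h1
        · have h6 := s6 d' hd' hinb'
          rw [hupd_a] at h6
          exact h6
      · have hphi := afPhi_update n m g (a.1 + d.1, a.2 + d.2) hinb (1 + g a) (by omega) (by omega)
        simp only [List.length_append, List.length_singleton] at s7 ⊢
        omega
    · have hstep : afFStep n m a (q, g) d = (q, g) := by
        unfold afFStep
        rw [if_neg hcond]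
      rw [hstep]
      obtain ⟨s1, s2, s3, s4, s5, s6, s7⟩ := ih hrest q g hI
      refine ⟨s1, s2, s3, s4, s5, ?_, s7⟩
      intro d' hd' hinb'
      rw [List.mem_cons] at hd'
      rcases hd' with rfl | hd'
      · have hle : g (a.1 + d'.1, a.2 + d'.2) ≤ 1 + g a := by
          rcases hinb' with ⟨i1, i2, i3, i4⟩
          by_contra hx
          exact hcond ⟨i1, i2, i3, i4, by omega⟩
        exact le_trans (s1 _) hle
      · exact s6 d' hd' hinb' 

lemma afFireLoop_spec (n m : Int) (arr : List (List Int)) :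
    ∀ (fuel : Nat) (q : List (Int × Int)) (g : (Int × Int) → Int),
    afFireInv n m arr q g → afPhi n m g + q.length < fuel →
    afInv2 n m arr (afFireLoop n m fuel q g) ∧
    (∀ a, afInb n m a → ∀ b, afAdj a b → afInb n m b →
      afFireLoop n m fuel q g b ≤ 1 + afFireLoop n m fuel q g a) := by
  intro fuel
  induction fuel with
  | zero =>
    intro q g hInv hmu
    omega
  | succ fuel ih =>
    intro q g hInv hmu
    cases q with
    | nil =>
      simp only [afFireLoop]
      refine ⟨hInv.1, ?_⟩
      intro a ha b hab hb
      rcases hInv.2 a ha with h | h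
      · exact absurd h (List.not_mem_nil)
      · exact h b hab hb
    | cons a rest =>
      simp only [afFireLoop]
      rw [afFireBody_eq]
      obtain ⟨s1, s2, s3, s4, s5, s6, s7⟩ :=
        afFireBody_spec n m arr a afDirs (fun d hd => hd) rest g hInv.1
      apply ih
      · refine ⟨s2, ?_⟩
        intro a' ha'
        rcases hInv.2 a' ha' with hq | hcl
        · rw [List.mem_cons] at hq
          rcases hq with rfl | hq
          · right
            intro b hab hb
            rcases hab with ⟨d, hd, rfl⟩
            have h6 := s6 d hd hb
            rw [s5]
            exact h6
          · exact Or.inl (s3 a' hq)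
        · by_cases hch : (afDirs.foldl (afFStep n m a) (rest, g)).2 a' = g a'
          · right
            intro b hab hb
            rw [hch]
            exact le_trans (s1 b) (hcl b hab hb)
          · exact Or.inl (s4 a' hch)
      · simp only [List.length_cons] at hmu
        omega

lemma afGoodFire_of (n m : Int) (arr : List (List Int)) (g : (Int × Int) → Int)
    (h2 : afInv2 n m arr g)
    (hst : ∀ a, afInb n m a → ∀ b, afAdj a b → afInb n m b → g b ≤ 1 + g a) :
    afGoodFire n m arr g := by
  refine ⟨h2.1, ?_⟩
  have complete : ∀ (k : Nat) (c : Int × Int), afF n m arr k c → g c ≤ (k : Int) := by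
    intro k
    induction k with
    | zero =>
      intro c hc
      simp [h2.2.1 c hc]
    | succ k ih =>
      intro c hc
      rcases (afF_succ n m arr k c).mp hc with hc | ⟨hinb, a, ha, hadj⟩
      · have := ih c hc
        push_cast
        omega
      · have hga := ih a ha
        have hainb := afF_inb n m arr ha
        have hstep := hst a hainb c hadj hinb
        push_cast
        push_cast at hga
        omega
  intro c k hk
  constructor
  · intro hle
    rcases h2.2.2 c with hE | hF
    · omega
    · refine afF_mono n m arr ?_ hF
      have h0 := (h2.1 c).1
      omega
  · intro hF
    exact complete k c hF

-- ---------- port A: dist loop ----------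

-- the fold step of afDistBody, named for the proofs
def afDStep (n m : Int) (g : (Int × Int) → Int) (a : Int × Int)
    (st : List (Int × Int) × ((Int × Int) → Int)) (d : Int × Int) :
    List (Int × Int) × ((Int × Int) → Int) :=
  if 0 ≤ a.1 + d.1 ∧ a.1 + d.1 < n ∧ 0 ≤ a.2 + d.2 ∧ a.2 + d.2 < m ∧
      st.2 (a.1 + d.1, a.2 + d.2) > 1 + st.2 a ∧ g (a.1 + d.1, a.2 + d.2) > 1 + st.2 a then
    (st.1 ++ [(a.1 + d.1, a.2 + d.2)], Function.update st.2 (a.1 + d.1, a.2 + d.2) (1 + st.2 a))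
  else st

lemma afDistBody_eq (n m : Int) (g : (Int × Int) → Int) (a : Int × Int)
    (st : List (Int × Int) × ((Int × Int) → Int)) :
    afDistBody n m g a st = afDirs.foldl (afDStep n m g a) st := rfl

lemma afDistBody_spec (n m x y : Int) (arr : List (List Int)) (g : (Int × Int) → Int)
    (hg : afGoodFire n m arr g) (a : Int × Int)
    (ds : List (Int × Int)) (hds : ∀ d ∈ ds, d ∈ afDirs)
    (q : List (Int × Int)) (h : (Int × Int) → Int)
    (hJ1 : ∀ c, 0 ≤ h c ∧ h c ≤ 1000000000)
    (hJ2 : ∀ c, h c = 1000000000 ∨ afReach n m x y arr (h c).toNat c)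
    (hcont : ¬ g a ≤ h a) :
    (∀ c, (ds.foldl (afDStep n m g a) (q, h)).2 c ≤ h c) ∧
    (∀ c, 0 ≤ (ds.foldl (afDStep n m g a) (q, h)).2 c ∧
      (ds.foldl (afDStep n m g a) (q, h)).2 c ≤ 1000000000) ∧
    (∀ c, (ds.foldl (afDStep n m g a) (q, h)).2 c = 1000000000 ∨
      afReach n m x y arr ((ds.foldl (afDStep n m g a) (q, h)).2 c).toNat c) ∧
    (∀ c, c ∈ q → c ∈ (ds.foldl (afDStep n m g a) (q, h)).1) ∧
    (∀ c, (ds.foldl (afDStep n m g a) (q, h)).2 c ≠ h c →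
      c ∈ (ds.foldl (afDStep n m g a) (q, h)).1) ∧
    ((ds.foldl (afDStep n m g a) (q, h)).2 a = h a) ∧
    (∀ d ∈ ds, afInb n m (a.1 + d.1, a.2 + d.2) →
      ((ds.foldl (afDStep n m g a) (q, h)).2 (a.1 + d.1, a.2 + d.2) ≤ 1 + h a ∨
       g (a.1 + d.1, a.2 + d.2) ≤ 1 + h a)) ∧
    afPhi n m (ds.foldl (afDStep n m g a) (q, h)).2 +
      (ds.foldl (afDStep n m g a) (q, h)).1.length ≤ afPhi n m h + q.length := by
  induction ds generalizing q h with
  | nil =>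
    refine ⟨fun c => le_refl _, hJ1, hJ2, fun c hc => hc, fun c hc => absurd rfl hc, rfl,
      ?_, le_refl _⟩
    intro d hd
    exact absurd hd (List.not_mem_nil)
  | cons d rest ih =>
    have hd0 : d ∈ afDirs := hds d (by simp)
    have hrest : ∀ d' ∈ rest, d' ∈ afDirs := fun d' hd' => hds d' (by simp [hd'])
    have hadj : afAdj a (a.1 + d.1, a.2 + d.2) := ⟨d, hd0, rfl⟩
    have hne : (a.1 + d.1, a.2 + d.2) ≠ a := afAdj_ne hadj
    simp only [List.foldl_cons]
    by_cases hcond : 0 ≤ a.1 + d.1 ∧ a.1 + d.1 < n ∧ 0 ≤ a.2 + d.2 ∧ a.2 + d.2 < m ∧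
        h (a.1 + d.1, a.2 + d.2) > 1 + h a ∧ g (a.1 + d.1, a.2 + d.2) > 1 + h a
    · have hstep : afDStep n m g a (q, h) d =
          (q ++ [(a.1 + d.1, a.2 + d.2)],
           Function.update h (a.1 + d.1, a.2 + d.2) (1 + h a)) := by
        unfold afDStep
        rw [if_pos hcond]
      rw [hstep]
      have hinb : afInb n m (a.1 + d.1, a.2 + d.2) :=
        ⟨hcond.1, hcond.2.1, hcond.2.2.1, hcond.2.2.2.1⟩
      have hha0 := (hJ1 a).1
      have hhaE := (hJ1 a).2
      have hnbE := (hJ1 (a.1 + d.1, a.2 + d.2)).2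
      have hgt := hcond.2.2.2.2.1
      have hgf := hcond.2.2.2.2.2
      have hgaE := (hg.1 a).2
      have hJ1' : ∀ c, 0 ≤ Function.update h (a.1 + d.1, a.2 + d.2) (1 + h a) c ∧
          Function.update h (a.1 + d.1, a.2 + d.2) (1 + h a) c ≤ 1000000000 := by
        intro c
        by_cases hcc : c = (a.1 + d.1, a.2 + d.2)
        · rw [hcc, Function.update_self]
          omega
        · rw [Function.update_of_ne hcc]
          exact hJ1 c
      have hJ2' : ∀ c, Function.update h (a.1 + d.1, a.2 + d.2) (1 + h a) c = 1000000000 ∨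
          afReach n m x y arr
            ((Function.update h (a.1 + d.1, a.2 + d.2) (1 + h a) c).toNat) c := by
        intro c
        by_cases hcc : c = (a.1 + d.1, a.2 + d.2)
        · subst hcc
          rw [Function.update_self]
          right
          have hhaNE : h a ≠ 1000000000 := by omega
          rcases hJ2 a with hE | hRa
          · exact absurd hE hhaNE
          have hcast : ((h a).toNat : Int) = h a := by omega
          have hnFa : ¬ afF n m arr (h a).toNat a := by
            intro hx
            have hle := (hg.2 a (h a).toNat (by omega)).mpr hx
            rw [hcast] at hle
            exact hcont hle
          have hnFc : ¬ afF n m arr ((h a).toNat + 1) (a.1 + d.1, a.2 + d.2) := by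
            intro hx
            have := (hg.2 (a.1 + d.1, a.2 + d.2) ((h a).toNat + 1) (by push_cast; omega)).mpr hx
            push_cast at this
            omega
          have htn : (1 + h a).toNat = (h a).toNat + 1 := by omega
          rw [htn]
          exact (afReach_succ n m x y arr _ _).mpr ⟨hinb, hnFc, a, hRa, hnFa, hadj⟩
        · rw [Function.update_of_ne hcc]
          exact hJ2 c
      have hupd_a : Function.update h (a.1 + d.1, a.2 + d.2) (1 + h a) a = h a :=
        Function.update_of_ne (Ne.symm hne) _ _
      have hcont' : ¬ g a ≤ Function.update h (a.1 + d.1, a.2 + d.2) (1 + h a) a := by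
        rw [hupd_a]
        exact hcont
      obtain ⟨s1, s2, s3, s4, s5, s6, s7, s8⟩ :=
        ih hrest (q ++ [(a.1 + d.1, a.2 + d.2)])
          (Function.update h (a.1 + d.1, a.2 + d.2) (1 + h a)) hJ1' hJ2' hcont'
      have hupd_le : ∀ c, Function.update h (a.1 + d.1, a.2 + d.2) (1 + h a) c ≤ h c := by
        intro c
        by_cases hcc : c = (a.1 + d.1, a.2 + d.2)
        · rw [hcc, Function.update_self]
          omega
        · rw [Function.update_of_ne hcc]
      refine ⟨fun c => le_trans (s1 c) (hupd_le c), s2, s3, ?_, ?_, ?_, ?_, ?_⟩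
      · intro c hc
        exact s4 c (by simp [hc])
      · intro c hc
        by_cases hcu : (rest.foldl (afDStep n m g a)
            (q ++ [(a.1 + d.1, a.2 + d.2)],
             Function.update h (a.1 + d.1, a.2 + d.2) (1 + h a))).2 c =
            Function.update h (a.1 + d.1, a.2 + d.2) (1 + h a) c
        · have hcne : Function.update h (a.1 + d.1, a.2 + d.2) (1 + h a) c ≠ h c := by
            rw [← hcu]
            exact hc
          have hceq : c = (a.1 + d.1, a.2 + d.2) := by
            by_contra hx
            rw [Function.update_of_ne hx] at hcne
            exact hcne rfl
          exact s4 c (by simp [hceq])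
        · exact s5 c hcu
      · rw [s6, hupd_a]
      · intro d' hd' hinb'
        rw [List.mem_cons] at hd'
        rcases hd' with rfl | hd'
        · left
          have h1 := s1 (a.1 + d'.1, a.2 + d'.2)
          rw [Function.update_self] at h1
          exact h1
        · have h7 := s7 d' hd' hinb'
          rw [hupd_a] at h7
          exact h7
      · have hphi := afPhi_update n m h (a.1 + d.1, a.2 + d.2) hinb (1 + h a) (by omega) (by omega)
        simp only [List.length_append, List.length_singleton] at s8 ⊢
        omega
    · have hstep : afDStep n m g a (q, h) d = (q, h) := by
        unfold afDStep
        rw [if_neg hcond]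
      rw [hstep]
      obtain ⟨s1, s2, s3, s4, s5, s6, s7, s8⟩ := ih hrest q h hJ1 hJ2 hcont
      refine ⟨s1, s2, s3, s4, s5, s6, ?_, s8⟩
      intro d' hd' hinb'
      rw [List.mem_cons] at hd'
      rcases hd' with rfl | hd'
      · rcases hinb' with ⟨i1, i2, i3, i4⟩
        by_cases hx : h (a.1 + d'.1, a.2 + d'.2) ≤ 1 + h a
        · exact Or.inl (le_trans (s1 _) hx)
        · right
          by_contra hy
          exact hcond ⟨i1, i2, i3, i4, by omega, by omega⟩
      · exact s7 d' hd' hinb' 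

lemma afDistLoop_spec (n m x y : Int) (arr : List (List Int)) (g : (Int × Int) → Int)
    (hg : afGoodFire n m arr g) :
    ∀ (fuel : Nat) (q : List (Int × Int)) (h : (Int × Int) → Int),
    afDistInv n m x y arr g q h → afPhi n m h + q.length < fuel →
    (∀ c, afDistLoop n m g fuel q h c ≤ h c) ∧
    (∀ c, 0 ≤ afDistLoop n m g fuel q h c ∧ afDistLoop n m g fuel q h c ≤ 1000000000) ∧
    (∀ c, afDistLoop n m g fuel q h c = 1000000000 ∨
      afReach n m x y arr (afDistLoop n m g fuel q h c).toNat c) ∧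
    (∀ a, afInb n m a → g a ≤ afDistLoop n m g fuel q h a ∨
      ∀ b, afAdj a b → afInb n m b →
        (afDistLoop n m g fuel q h b ≤ 1 + afDistLoop n m g fuel q h a ∨
         g b ≤ 1 + afDistLoop n m g fuel q h a)) := by
  intro fuel
  induction fuel with
  | zero =>
    intro q h hInv hmu
    omega
  | succ fuel ih =>
    intro q h hInv hmu
    cases q with
    | nil =>
      simp only [afDistLoop]
      refine ⟨fun c => le_refl _, hInv.1, hInv.2.1, ?_⟩
      intro a ha
      rcases hInv.2.2 a ha with hq | hrest
      · exact absurd hq (List.not_mem_nil)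
      · exact hrest
    | cons a rest =>
      simp only [afDistLoop]
      by_cases hga : g a ≤ h a
      · rw [if_pos hga]
        have hInv' : afDistInv n m x y arr g rest h := by
          refine ⟨hInv.1, hInv.2.1, ?_⟩
          intro a' ha'
          rcases hInv.2.2 a' ha' with hq | hrest
          · rw [List.mem_cons] at hq
            rcases hq with rfl | hq
            · exact Or.inr (Or.inl hga)
            · exact Or.inl hq
          · exact Or.inr hrest
        apply ih rest h hInv'
        simp only [List.length_cons] at hmu
        omega
      · rw [if_neg hga]
        rw [afDistBody_eq]
        obtain ⟨s1, s2, s3, s4, s5, s6, s7, s8⟩ :=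
          afDistBody_spec n m x y arr g hg a afDirs (fun d hd => hd) rest h
            hInv.1 hInv.2.1 hga
        have hInv' : afDistInv n m x y arr g
            (afDirs.foldl (afDStep n m g a) (rest, h)).1
            (afDirs.foldl (afDStep n m g a) (rest, h)).2 := by
          refine ⟨s2, s3, ?_⟩
          intro a' ha'
          rcases hInv.2.2 a' ha' with hq | hcl
          · rw [List.mem_cons] at hq
            rcases hq with rfl | hq
            · right
              right
              intro b hab hb
              rcases hab with ⟨d, hd, rfl⟩
              have h7 := s7 d hd hb
              rw [s6]
              exact h7
            · exact Or.inl (s4 a' hq)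
          · rcases hcl with hcl | hcl
            · by_cases hch : (afDirs.foldl (afDStep n m g a) (rest, h)).2 a' = h a'
              · right
                left
                rw [hch]
                exact hcl
              · exact Or.inl (s5 a' hch)
            · by_cases hch : (afDirs.foldl (afDStep n m g a) (rest, h)).2 a' = h a'
              · right
                right
                intro b hab hb
                rw [hch]
                rcases hcl b hab hb with hx | hx
                · exact Or.inl (le_trans (s1 b) hx)
                · exact Or.inr hx
              · exact Or.inl (s5 a' hch)
        obtain ⟨t1, t2, t3, t4⟩ := ih _ _ hInv' (by
          simp only [List.length_cons] at hmu
          omega)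
        exact ⟨fun c => le_trans (t1 c) (s1 c), t2, t3, t4⟩

lemma afDist_complete (n m x y : Int) (arr : List (List Int)) (g h : (Int × Int) → Int)
    (hg : afGoodFire n m arr g)
    (hstart : h (x, y) ≤ 0)
    (hst : ∀ a, afInb n m a → g a ≤ h a ∨
      ∀ b, afAdj a b → afInb n m b → (h b ≤ 1 + h a ∨ g b ≤ 1 + h a))
    (hxy : afInb n m (x, y)) :
    ∀ (k : Nat), (k : Int) < 1000000000 → ∀ c, afReach n m x y arr k c → h c ≤ (k : Int) := by
  intro k
  induction k with
  | zero =>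
    intro _ c hc
    rw [(afReach_zero n m x y arr c).mp hc]
    exact_mod_cast hstart
  | succ k ih =>
    intro hklt c hc
    rcases (afReach_succ n m x y arr k c).mp hc with ⟨hinb, hnf, a, hra, hnfa, hadj⟩
    have hainb : afInb n m a := afReach_inb n m x y arr hxy hra
    have hha := ih (by push_cast at hklt; omega) a hra
    have hga : ¬ g a ≤ h a := by
      intro hle
      exact hnfa ((hg.2 a k (by push_cast at hklt; omega)).mp (le_trans hle hha))
    rcases hst a hainb with hcase | hcase
    · exact absurd hcase hga
    rcases hcase c hadj hinb with hle | hle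
    · push_cast
      push_cast at hha
      omega
    · exfalso
      apply hnf
      refine (hg.2 c (k + 1) ?_).mp ?_
      · push_cast
        push_cast at hklt
        omega
      · push_cast
        push_cast at hha
        omega

-- ---------- port B: sets ----------

lemma ab_af_get (arr : List (List Int)) (i j : Int) : abGet arr i j = afGet arr i j := rfl

lemma abRow_spec (m : Int) (arr : List (List Int)) (i : Int) (js : List Int)
    (s : PySem.Set (Int × Int)) (hs : s.Nodup) :
    (∀ c, c ∈ (js.foldl (fun s j =>
        if abGet arr i j = 1 then PySem.Set.add s (i, j) else s) s) ↔
      c ∈ s ∨ (c.1 = i ∧ c.2 ∈ js ∧ abGet arr i c.2 = 1)) ∧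
    (js.foldl (fun s j =>
        if abGet arr i j = 1 then PySem.Set.add s (i, j) else s) s).Nodup := by
  induction js generalizing s with
  | nil =>
    refine ⟨fun c => ?_, hs⟩
    simp
  | cons j js ih =>
    simp only [List.foldl_cons]
    by_cases hj : abGet arr i j = 1
    · rw [if_pos hj]
      obtain ⟨ihm, ihn⟩ := ih (PySem.Set.add s (i, j)) (PySem.Set.nodup_add _ _ hs)
      refine ⟨fun c => ?_, ihn⟩
      rw [ihm c, PySem.Set.mem_add]
      constructor
      · rintro ((hc | hc) | ⟨h1, h2, h3⟩)
        · exact Or.inl hc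
        · exact Or.inr ⟨by rw [hc], by rw [hc]; exact List.mem_cons_self, by rw [hc]; exact hj⟩
        · exact Or.inr ⟨h1, List.mem_cons_of_mem j h2, h3⟩
      · rintro (hc | ⟨h1, h2, h3⟩)
        · exact Or.inl (Or.inl hc)
        · rw [List.mem_cons] at h2
          rcases h2 with h2 | h2
          · refine Or.inl (Or.inr ?_)
            rw [Prod.ext_iff]
            exact ⟨h1, h2⟩
          · exact Or.inr ⟨h1, h2, h3⟩
    · rw [if_neg hj]
      obtain ⟨ihm, ihn⟩ := ih s hs
      refine ⟨fun c => ?_, ihn⟩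
      rw [ihm c]
      constructor
      · rintro (hc | ⟨h1, h2, h3⟩)
        · exact Or.inl hc
        · exact Or.inr ⟨h1, List.mem_cons_of_mem j h2, h3⟩
      · rintro (hc | ⟨h1, h2, h3⟩)
        · exact Or.inl hc
        · rw [List.mem_cons] at h2
          rcases h2 with h2 | h2
          · rw [h2] at h3
            exact absurd h3 hj
          · exact Or.inr ⟨h1, h2, h3⟩

lemma abAll_spec (m : Int) (arr : List (List Int)) (is : List Int)
    (s : PySem.Set (Int × Int)) (hs : s.Nodup) :
    (∀ c, c ∈ (is.foldl (fun s i => (PySem.List.pyRange 0 m 1).foldl (fun s j =>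
        if abGet arr i j = 1 then PySem.Set.add s (i, j) else s) s) s) ↔
      c ∈ s ∨ (c.1 ∈ is ∧ 0 ≤ c.2 ∧ c.2 < m ∧ abGet arr c.1 c.2 = 1)) ∧
    (is.foldl (fun s i => (PySem.List.pyRange 0 m 1).foldl (fun s j =>
        if abGet arr i j = 1 then PySem.Set.add s (i, j) else s) s) s).Nodup := by
  induction is generalizing s with
  | nil =>
    refine ⟨fun c => ?_, hs⟩
    simp
  | cons i is ih =>
    simp only [List.foldl_cons]
    obtain ⟨rm, rn⟩ := abRow_spec m arr i (PySem.List.pyRange 0 m 1) s hs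
    obtain ⟨ihm, ihn⟩ := ih _ rn
    refine ⟨fun c => ?_, ihn⟩
    rw [ihm c, rm c, PySem.List.mem_pyRange_one]
    constructor
    · rintro ((hc | ⟨h1, ⟨h2a, h2b⟩, h3⟩) | ⟨h1, h2, h3, h4⟩)
      · exact Or.inl hc
      · exact Or.inr ⟨by rw [h1]; exact List.mem_cons_self, h2a, h2b, by rw [h1]; exact h3⟩
      · exact Or.inr ⟨List.mem_cons_of_mem i h1, h2, h3, h4⟩
    · rintro (hc | ⟨h1, h2, h3, h4⟩)
      · exact Or.inl (Or.inl hc)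
      · rw [List.mem_cons] at h1
        rcases h1 with h1 | h1
        · exact Or.inl (Or.inr ⟨h1, ⟨h2, h3⟩, by rw [← h1]; exact h4⟩)
        · exact Or.inr ⟨h1, h2, h3, h4⟩

lemma abFireSet_mem (n m : Int) (arr : List (List Int)) (c : Int × Int) :
    c ∈ abFireSet n m arr ↔ afSrc n m arr c := by
  unfold abFireSet
  rw [(abAll_spec m arr (PySem.List.pyRange 0 n 1) PySem.Set.empty (by simp [PySem.Set.empty])).1 c]
  rw [← af_src_iff n m arr c]
  simp only [ab_af_get]
  constructor
  · rintro (hc | hc)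
    · simp [PySem.Set.empty] at hc
    · exact hc
  · intro hc
    exact Or.inr hc

lemma abFireSet_nodup (n m : Int) (arr : List (List Int)) : (abFireSet n m arr).Nodup := by
  unfold abFireSet
  exact (abAll_spec m arr (PySem.List.pyRange 0 n 1) PySem.Set.empty (by simp [PySem.Set.empty])).2

lemma abAdj_iff (a b : Int × Int) :
    (∃ d ∈ abDirs, b = (a.1 + d.1, a.2 + d.2)) ↔ afAdj a b := by
  unfold afAdj abDirs afDirs
  simp only [List.mem_cons, List.not_mem_nil, or_false, exists_eq_or_imp, exists_eq_left]
  tauto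

-- the shared fold step of abTick, named for the proofs
def abStep (n m : Int) (ok : (Int × Int) → Bool) (c : Int × Int)
    (st : PySem.Set (Int × Int) × PySem.Set (Int × Int)) (d : Int × Int) :
    PySem.Set (Int × Int) × PySem.Set (Int × Int) :=
  if (0 ≤ c.1 + d.1 ∧ c.1 + d.1 < n ∧ 0 ≤ c.2 + d.2 ∧ c.2 + d.2 < m) ∧
      ok (c.1 + d.1, c.2 + d.2) = true ∧
      ¬ PySem.Set.contains st.1 (c.1 + d.1, c.2 + d.2) = true then
    (PySem.Set.add st.1 (c.1 + d.1, c.2 + d.2), PySem.Set.add st.2 (c.1 + d.1, c.2 + d.2))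
  else st

lemma abTick_eq (n m : Int) (ok : (Int × Int) → Bool) (front : List (Int × Int))
    (seen out : PySem.Set (Int × Int)) :
    abTick n m ok front seen out =
      front.foldl (fun st c => abDirs.foldl (abStep n m ok c) st) (seen, out) := rfl

lemma abStepFold_spec (n m : Int) (ok : (Int × Int) → Bool) (c0 : Int × Int)
    (ds : List (Int × Int)) (seen out : PySem.Set (Int × Int))
    (hs : seen.Nodup) (ho : out.Nodup) :
    (∀ c, c ∈ (ds.foldl (abStep n m ok c0) (seen, out)).1 ↔ c ∈ seen ∨
      (afInb n m c ∧ ok c = true ∧ ∃ d ∈ ds, c = (c0.1 + d.1, c0.2 + d.2))) ∧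
    (∀ c, c ∈ (ds.foldl (abStep n m ok c0) (seen, out)).2 ↔ c ∈ out ∨
      (afInb n m c ∧ ok c = true ∧ c ∉ seen ∧ ∃ d ∈ ds, c = (c0.1 + d.1, c0.2 + d.2))) ∧
    (ds.foldl (abStep n m ok c0) (seen, out)).1.Nodup ∧
    (ds.foldl (abStep n m ok c0) (seen, out)).2.Nodup ∧
    (∃ extra, (ds.foldl (abStep n m ok c0) (seen, out)).1 = seen ++ extra) := by
  induction ds generalizing seen out with
  | nil =>
    refine ⟨fun c => by simp, fun c => by simp, hs, ho, [], by simp⟩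
  | cons d ds ih =>
    simp only [List.foldl_cons]
    by_cases hcond : (0 ≤ c0.1 + d.1 ∧ c0.1 + d.1 < n ∧ 0 ≤ c0.2 + d.2 ∧ c0.2 + d.2 < m) ∧
        ok (c0.1 + d.1, c0.2 + d.2) = true ∧
        ¬ PySem.Set.contains seen (c0.1 + d.1, c0.2 + d.2) = true
    · have hstep : abStep n m ok c0 (seen, out) d =
          (PySem.Set.add seen (c0.1 + d.1, c0.2 + d.2),
           PySem.Set.add out (c0.1 + d.1, c0.2 + d.2)) := by
        unfold abStep
        rw [if_pos hcond]
      rw [hstep]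
      have hnb_notin : (c0.1 + d.1, c0.2 + d.2) ∉ seen := by
        intro hx
        exact hcond.2.2 ((PySem.Set.contains_iff _ _).mpr hx)
      have hinb : afInb n m (c0.1 + d.1, c0.2 + d.2) :=
        ⟨hcond.1.1, hcond.1.2.1, hcond.1.2.2.1, hcond.1.2.2.2⟩
      obtain ⟨s1, s2, s3, s4, s5⟩ := ih (PySem.Set.add seen (c0.1 + d.1, c0.2 + d.2))
        (PySem.Set.add out (c0.1 + d.1, c0.2 + d.2))
        (PySem.Set.nodup_add _ _ hs) (PySem.Set.nodup_add _ _ ho)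
      refine ⟨fun c => ?_, fun c => ?_, s3, s4, ?_⟩
      · rw [s1 c, PySem.Set.mem_add]
        constructor
        · rintro ((hc | hc) | ⟨h1, h2, d', hd', h3⟩)
          · exact Or.inl hc
          · exact Or.inr ⟨by rw [hc]; exact hinb, by rw [hc]; exact hcond.2.1, d,
              List.mem_cons_self, hc⟩
          · exact Or.inr ⟨h1, h2, d', List.mem_cons_of_mem d hd', h3⟩
        · rintro (hc | ⟨h1, h2, d', hd', h3⟩)
          · exact Or.inl (Or.inl hc)
          · rw [List.mem_cons] at hd'
            rcases hd' with rfl | hd'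
            · exact Or.inl (Or.inr h3)
            · exact Or.inr ⟨h1, h2, d', hd', h3⟩
      · rw [s2 c, PySem.Set.mem_add]
        constructor
        · rintro ((hc | hc) | ⟨h1, h2, hc3, d', hd', h3⟩)
          · exact Or.inl hc
          · exact Or.inr ⟨by rw [hc]; exact hinb, by rw [hc]; exact hcond.2.1,
              by rw [hc]; exact hnb_notin, d, List.mem_cons_self, hc⟩
          · refine Or.inr ⟨h1, h2, ?_, d', List.mem_cons_of_mem d hd', h3⟩
            intro hx
            exact hc3 ((PySem.Set.mem_add _ _ _).mpr (Or.inl hx))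
        · rintro (hc | ⟨h1, h2, hc3, d', hd', h3⟩)
          · exact Or.inl (Or.inl hc)
          · rw [List.mem_cons] at hd'
            rcases hd' with rfl | hd'
            · exact Or.inl (Or.inr h3)
            · by_cases hcnb : c = (c0.1 + d.1, c0.2 + d.2)
              · exact Or.inl (Or.inr hcnb)
              · refine Or.inr ⟨h1, h2, ?_, d', hd', h3⟩
                intro hx
                rcases (PySem.Set.mem_add _ _ _).mp hx with hx | hx
                · exact hc3 hx
                · exact hcnb hx
      · obtain ⟨extra, hex⟩ := s5
        refine ⟨(c0.1 + d.1, c0.2 + d.2) :: extra, ?_⟩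
        rw [hex]
        have hadd : PySem.Set.add seen (c0.1 + d.1, c0.2 + d.2) =
            seen ++ [(c0.1 + d.1, c0.2 + d.2)] := by
          unfold PySem.Set.add
          rw [if_neg hcond.2.2]
        rw [hadd, List.append_assoc]
        rfl
    · have hstep : abStep n m ok c0 (seen, out) d = (seen, out) := by
        unfold abStep
        rw [if_neg hcond]
      rw [hstep]
      obtain ⟨s1, s2, s3, s4, s5⟩ := ih seen out hs ho
      refine ⟨fun c => ?_, fun c => ?_, s3, s4, s5⟩
      · rw [s1 c]
        constructor
        · rintro (hc | ⟨h1, h2, d', hd', h3⟩)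
          · exact Or.inl hc
          · exact Or.inr ⟨h1, h2, d', List.mem_cons_of_mem d hd', h3⟩
        · rintro (hc | ⟨h1, h2, d', hd', h3⟩)
          · exact Or.inl hc
          · rw [List.mem_cons] at hd'
            rcases hd' with heq | hd'
            · rw [heq] at h3
              left
              have hcontains : PySem.Set.contains seen (c0.1 + d.1, c0.2 + d.2) = true := by
                by_contra hxc
                apply hcond
                refine ⟨?_, ?_, hxc⟩
                · rw [h3] at h1
                  exact ⟨h1.1, h1.2.1, h1.2.2.1, h1.2.2.2⟩
                · rw [h3] at h2
                  exact h2
              rw [h3]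
              exact (PySem.Set.contains_iff _ _).mp hcontains
            · exact Or.inr ⟨h1, h2, d', hd', h3⟩
      · rw [s2 c]
        constructor
        · rintro (hc | ⟨h1, h2, hc3, d', hd', h3⟩)
          · exact Or.inl hc
          · exact Or.inr ⟨h1, h2, hc3, d', List.mem_cons_of_mem d hd', h3⟩
        · rintro (hc | ⟨h1, h2, hc3, d', hd', h3⟩)
          · exact Or.inl hc
          · rw [List.mem_cons] at hd'
            rcases hd' with heq | hd'
            · rw [heq] at h3
              exfalso
              apply hcond
              refine ⟨?_, ?_, ?_⟩
              · rw [h3] at h1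
                exact ⟨h1.1, h1.2.1, h1.2.2.1, h1.2.2.2⟩
              · rw [h3] at h2
                exact h2
              · intro hxc
                rw [← h3] at hxc
                exact hc3 ((PySem.Set.contains_iff _ _).mp hxc)
            · exact Or.inr ⟨h1, h2, hc3, d', hd', h3⟩

lemma abTick_spec (n m : Int) (ok : (Int × Int) → Bool) (front : List (Int × Int))
    (seen out : PySem.Set (Int × Int)) (hs : seen.Nodup) (ho : out.Nodup) :
    (∀ c, c ∈ (abTick n m ok front seen out).1 ↔ c ∈ seen ∨
      (afInb n m c ∧ ok c = true ∧ ∃ a ∈ front, afAdj a c)) ∧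
    (∀ c, c ∈ (abTick n m ok front seen out).2 ↔ c ∈ out ∨
      (afInb n m c ∧ ok c = true ∧ c ∉ seen ∧ ∃ a ∈ front, afAdj a c)) ∧
    (abTick n m ok front seen out).1.Nodup ∧ (abTick n m ok front seen out).2.Nodup ∧
    (∃ extra, (abTick n m ok front seen out).1 = seen ++ extra) := by
  induction front generalizing seen out with
  | nil =>
    rw [abTick_eq]
    refine ⟨fun c => by simp, fun c => by simp, hs, ho, [], by simp⟩
  | cons c0 front ih =>
    rw [abTick_eq]
    simp only [List.foldl_cons]
    obtain ⟨r1, r2, r3, r4, r5⟩ := abStepFold_spec n m ok c0 abDirs seen out hs ho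
    obtain ⟨t1, t2, t3, t4, t5⟩ := ih (abDirs.foldl (abStep n m ok c0) (seen, out)).1
      (abDirs.foldl (abStep n m ok c0) (seen, out)).2 r3 r4
    rw [abTick_eq] at t1 t2 t3 t4 t5
    have hr1 : ∀ c, c ∈ (abDirs.foldl (abStep n m ok c0) (seen, out)).1 ↔
        c ∈ seen ∨ (afInb n m c ∧ ok c = true ∧ afAdj c0 c) := by
      intro c
      rw [r1 c]
      constructor
      · rintro (hc | ⟨h1, h2, hd⟩)
        · exact Or.inl hc
        · exact Or.inr ⟨h1, h2, (abAdj_iff c0 c).mp hd⟩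
      · rintro (hc | ⟨h1, h2, hd⟩)
        · exact Or.inl hc
        · exact Or.inr ⟨h1, h2, (abAdj_iff c0 c).mpr hd⟩
    have hr2 : ∀ c, c ∈ (abDirs.foldl (abStep n m ok c0) (seen, out)).2 ↔
        c ∈ out ∨ (afInb n m c ∧ ok c = true ∧ c ∉ seen ∧ afAdj c0 c) := by
      intro c
      rw [r2 c]
      constructor
      · rintro (hc | ⟨h1, h2, h3, hd⟩)
        · exact Or.inl hc
        · exact Or.inr ⟨h1, h2, h3, (abAdj_iff c0 c).mp hd⟩
      · rintro (hc | ⟨h1, h2, h3, hd⟩)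
        · exact Or.inl hc
        · exact Or.inr ⟨h1, h2, h3, (abAdj_iff c0 c).mpr hd⟩
    refine ⟨fun c => ?_, fun c => ?_, t3, t4, ?_⟩
    · refine (t1 c).trans ?_
      rw [hr1 c]
      constructor
      · rintro ((hc | ⟨h1, h2, hd⟩) | ⟨h1, h2, a, ha, hd⟩)
        · exact Or.inl hc
        · exact Or.inr ⟨h1, h2, c0, List.mem_cons_self, hd⟩
        · exact Or.inr ⟨h1, h2, a, List.mem_cons_of_mem c0 ha, hd⟩
      · rintro (hc | ⟨h1, h2, a, ha, hd⟩)
        · exact Or.inl (Or.inl hc)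
        · rw [List.mem_cons] at ha
          rcases ha with rfl | ha
          · exact Or.inl (Or.inr ⟨h1, h2, hd⟩)
          · exact Or.inr ⟨h1, h2, a, ha, hd⟩
    · refine (t2 c).trans ?_
      rw [hr2 c]
      constructor
      · rintro ((hc | ⟨h1, h2, h3, hd⟩) | ⟨h1, h2, hc3, a, ha, hd⟩)
        · exact Or.inl hc
        · exact Or.inr ⟨h1, h2, h3, c0, List.mem_cons_self, hd⟩
        · have hc3' : c ∉ seen := by
            intro hx
            exact hc3 ((hr1 c).mpr (Or.inl hx))
          exact Or.inr ⟨h1, h2, hc3', a, List.mem_cons_of_mem c0 ha, hd⟩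
      · rintro (hc | ⟨h1, h2, h3, a, ha, hd⟩)
        · exact Or.inl (Or.inl hc)
        · rw [List.mem_cons] at ha
          rcases ha with rfl | ha
          · exact Or.inl (Or.inr ⟨h1, h2, h3, hd⟩)
          · by_cases hcm : c ∈ (abDirs.foldl (abStep n m ok c0) (seen, out)).1
            · rcases (hr1 c).mp hcm with hx | ⟨hx1, hx2, hx3⟩
              · exact absurd hx h3
              · exact Or.inl (Or.inr ⟨hx1, hx2, h3, hx3⟩)
            · exact Or.inr ⟨h1, h2, hcm, a, ha, hd⟩
    · obtain ⟨e1, he1⟩ := r5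
      obtain ⟨e2, he2⟩ := t5
      refine ⟨e1 ++ e2, ?_⟩
      rw [he2, he1, List.append_assoc]

lemma abLoop_nil (n m : Int) (fuel : Nat) (b f v : PySem.Set (Int × Int)) :
    abLoop n m (fuel + 1) b f [] v = 0 := by
  simp [abLoop]

lemma abLoop_spec (n m x y : Int) (arr : List (List Int)) :
    ∀ (fuel k : Nat) (burned ff frontier visited : PySem.Set (Int × Int)),
    (∀ c, c ∈ burned ↔ afF n m arr k c) → burned.Nodup →
    (∀ c, c ∈ ff ↔ afFFront n m arr k c) →
    (∀ c, c ∈ frontier ↔ afFrontier n m x y arr k c) →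
    (∀ c, c ∈ visited ↔ afVisited n m x y arr k c) → visited.Nodup →
    (∀ c ∈ visited, afInb n m c) → k + 1 ≤ visited.length →
    n.toNat * m.toNat + 2 ≤ fuel + k →
    ((abLoop n m fuel burned ff frontier visited = 1 ↔
        ∃ j, k < j ∧ afFrontier n m x y arr j (n - 1, m - 1)) ∧
     (abLoop n m fuel burned ff frontier visited = 0 ∨
      abLoop n m fuel burned ff frontier visited = 1)) := by
  intro fuel
  induction fuel with
  | zero =>
    intro k burned ff frontier visited hb hbn hf hq hv hvn hvi hvl hfuel
    exfalso
    have := af_nodup_inb_len n m visited hvn hvi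
    omega
  | succ fuel ih =>
    intro k burned ff frontier visited hb hbn hf hq hv hvn hvi hvl hfuel
    simp only [abLoop]
    by_cases hfe : frontier.isEmpty = true
    · rw [if_pos hfe]
      have hfr : ∀ c, ¬ afFrontier n m x y arr k c := by
        intro c hc
        have hmem := (hq c).mpr hc
        rw [List.isEmpty_iff] at hfe
        rw [hfe] at hmem
        exact absurd hmem (List.not_mem_nil)
      refine ⟨⟨fun h01 => absurd h01 (by norm_num), ?_⟩, Or.inl rfl⟩
      rintro ⟨j, hkj, hfj⟩
      exact absurd hfj (afFrontier_empty_mono n m x y arr hfr hkj _)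
    · rw [if_neg hfe]
      obtain ⟨f1, f2, f3, f4, f5⟩ := abTick_spec n m (fun _ => true) ff burned
        PySem.Set.empty hbn List.nodup_nil
      have hft1 : ∀ c, c ∈ (abTick n m (fun _ => true) ff burned PySem.Set.empty).1 ↔
          afF n m arr (k + 1) c := by
        intro c
        rw [f1 c, afF_step_front]
        constructor
        · rintro (hc | ⟨h1, _, a, ha, hd⟩)
          · exact Or.inl ((hb c).mp hc)
          · exact Or.inr ⟨h1, a, (hf a).mp ha, hd⟩
        · rintro (hc | ⟨h1, a, ha, hd⟩)
          · exact Or.inl ((hb c).mpr hc)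
          · exact Or.inr ⟨h1, rfl, a, (hf a).mpr ha, hd⟩
      have hft2 : ∀ c, c ∈ (abTick n m (fun _ => true) ff burned PySem.Set.empty).2 ↔
          afFFront n m arr (k + 1) c := by
        intro c
        rw [f2 c, afFFront_succ, afF_step_front]
        constructor
        · rintro (hc | ⟨h1, _, hnb, a, ha, hd⟩)
          · simp [PySem.Set.empty] at hc
          · have hnF : ¬ afF n m arr k c := fun hx => hnb ((hb c).mpr hx)
            exact ⟨Or.inr ⟨h1, a, (hf a).mp ha, hd⟩, hnF⟩
        · rintro ⟨hc | ⟨h1, a, ha, hd⟩, hnF⟩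
          · exact absurd hc hnF
          · exact Or.inr ⟨h1, rfl, fun hx => hnF ((hb c).mp hx), a, (hf a).mpr ha, hd⟩
      have hok : ∀ c : Int × Int,
          ((fun nb => ! PySem.Set.contains
            (abTick n m (fun _ => true) ff burned PySem.Set.empty).1 nb) c = true) ↔
            ¬ afF n m arr (k + 1) c := by
        intro c
        rw [Bool.not_eq_true']
        constructor
        · intro hfalse hx
          have := (PySem.Set.contains_iff _ _).mpr ((hft1 c).mpr hx)
          rw [hfalse] at this
          cases this
        · intro hx
          by_contra hcc
          rw [Bool.not_eq_false] at hcc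
          exact hx ((hft1 c).mp ((PySem.Set.contains_iff _ _).mp hcc))
      obtain ⟨p1, p2, p3, p4, p5⟩ := abTick_spec n m
        (fun nb => ! PySem.Set.contains
          (abTick n m (fun _ => true) ff burned PySem.Set.empty).1 nb)
        frontier visited PySem.Set.empty hvn List.nodup_nil
      have hpt2 : ∀ c, c ∈ (abTick n m (fun nb => ! PySem.Set.contains
          (abTick n m (fun _ => true) ff burned PySem.Set.empty).1 nb)
          frontier visited PySem.Set.empty).2 ↔ afFrontier n m x y arr (k + 1) c := by
        intro c
        rw [p2 c, afFrontier_succ]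
        constructor
        · rintro (hc | ⟨h1, h2, h3, a, ha, hd⟩)
          · simp [PySem.Set.empty] at hc
          · exact ⟨h1, (hok c).mp h2, fun hx => h3 ((hv c).mpr hx), a, (hq a).mp ha, hd⟩
        · rintro ⟨h1, h2, h3, a, ha, hd⟩
          · exact Or.inr ⟨h1, (hok c).mpr h2, fun hx => h3 ((hv c).mp hx), a, (hq a).mpr ha, hd⟩
      have hpt1 : ∀ c, c ∈ (abTick n m (fun nb => ! PySem.Set.contains
          (abTick n m (fun _ => true) ff burned PySem.Set.empty).1 nb)
          frontier visited PySem.Set.empty).1 ↔ afVisited n m x y arr (k + 1) c := by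
        intro c
        rw [p1 c, afVisited_succ, afFrontier_succ]
        constructor
        · rintro (hc | ⟨h1, h2, a, ha, hd⟩)
          · exact Or.inl ((hv c).mp hc)
          · by_cases hvis : afVisited n m x y arr k c
            · exact Or.inl hvis
            · exact Or.inr ⟨h1, (hok c).mp h2, hvis, a, (hq a).mp ha, hd⟩
        · rintro (hc | ⟨h1, h2, h3, a, ha, hd⟩)
          · exact Or.inl ((hv c).mpr hc)
          · exact Or.inr ⟨h1, (hok c).mpr h2, a, (hq a).mpr ha, hd⟩
      have hpt_inb : ∀ c ∈ (abTick n m (fun nb => ! PySem.Set.contains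
          (abTick n m (fun _ => true) ff burned PySem.Set.empty).1 nb)
          frontier visited PySem.Set.empty).1, afInb n m c := by
        intro c hc
        rcases (p1 c).mp hc with hc | ⟨h1, _⟩
        · exact hvi c hc
        · exact h1
      by_cases htc : PySem.Set.contains (abTick n m (fun nb => ! PySem.Set.contains
          (abTick n m (fun _ => true) ff burned PySem.Set.empty).1 nb)
          frontier visited PySem.Set.empty).2 (n - 1, m - 1) = true
      · rw [if_pos htc]
        have htgt := (hpt2 (n - 1, m - 1)).mp ((PySem.Set.contains_iff _ _).mp htc)
        exact ⟨⟨fun _ => ⟨k + 1, by omega, htgt⟩, fun _ => rfl⟩, Or.inr rfl⟩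
      · rw [if_neg htc]
        have hnotgt : ¬ afFrontier n m x y arr (k + 1) (n - 1, m - 1) := by
          intro hx
          exact htc ((PySem.Set.contains_iff _ _).mpr ((hpt2 (n - 1, m - 1)).mpr hx))
        by_cases hne2 : (abTick n m (fun nb => ! PySem.Set.contains
            (abTick n m (fun _ => true) ff burned PySem.Set.empty).1 nb)
            frontier visited PySem.Set.empty).2 = []
        · -- the new frontier is empty: one more unfolding returns 0
          have hfr1 : ∀ c, ¬ afFrontier n m x y arr (k + 1) c := by
            intro c hc
            have hmem := (hpt2 c).mpr hc
            rw [hne2] at hmem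
            exact absurd hmem (List.not_mem_nil)
          have hnores : ∀ j, k < j → ¬ afFrontier n m x y arr j (n - 1, m - 1) := by
            intro j hj
            rcases Nat.lt_or_ge (k + 1) j with hlt | hge
            · exact afFrontier_empty_mono n m x y arr hfr1 hlt _
            · have hj1 : j = k + 1 := by omega
              rw [hj1]
              exact hfr1 _
          cases fuel with
          | zero =>
            exfalso
            have := af_nodup_inb_len n m visited hvn hvi
            omega
          | succ fuel' =>
            rw [hne2, abLoop_nil]
            refine ⟨⟨fun h01 => absurd h01 (by norm_num), ?_⟩, Or.inl rfl⟩
            rintro ⟨j, hkj, hfj⟩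
            exact absurd hfj (hnores j hkj)
        · -- the new frontier is nonempty: the visited set grew
          have hvl' : k + 2 ≤ (abTick n m (fun nb => ! PySem.Set.contains
              (abTick n m (fun _ => true) ff burned PySem.Set.empty).1 nb)
              frontier visited PySem.Set.empty).1.length := by
            obtain ⟨c1, hc1⟩ := List.exists_mem_of_ne_nil _ hne2
            have hc1f := (hpt2 c1).mp hc1
            have hc1nv : c1 ∉ visited := by
              intro hx
              exact ((afFrontier_succ n m x y arr k c1).mp hc1f).2.2.1 ((hv c1).mp hx)
            have hc1in : c1 ∈ (abTick n m (fun nb => ! PySem.Set.contains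
                (abTick n m (fun _ => true) ff burned PySem.Set.empty).1 nb)
                frontier visited PySem.Set.empty).1 :=
              (hpt1 c1).mpr (Or.inr hc1f)
            obtain ⟨extra, hex⟩ := p5
            rw [hex] at hc1in
            rw [List.mem_append] at hc1in
            have hextra : extra ≠ [] := by
              intro hx
              rw [hx] at hc1in
              rcases hc1in with hc | hc
              · exact hc1nv hc
              · exact absurd hc (List.not_mem_nil)
            rw [hex, List.length_append]
            have : 1 ≤ extra.length := List.length_pos_of_ne_nil hextra
            omega
          obtain ⟨hiff, hdisj⟩ := ih (k + 1)
            (abTick n m (fun _ => true) ff burned PySem.Set.empty).1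
            (abTick n m (fun _ => true) ff burned PySem.Set.empty).2
            (abTick n m (fun nb => ! PySem.Set.contains
              (abTick n m (fun _ => true) ff burned PySem.Set.empty).1 nb)
              frontier visited PySem.Set.empty).2
            (abTick n m (fun nb => ! PySem.Set.contains
              (abTick n m (fun _ => true) ff burned PySem.Set.empty).1 nb)
              frontier visited PySem.Set.empty).1
            hft1 f3 hft2 hpt2 hpt1 p3 hpt_inb hvl' (by omega)
          refine ⟨?_, hdisj⟩
          refine hiff.trans ?_
          constructor
          · rintro ⟨j, hkj, hfj⟩
            exact ⟨j, by omega, hfj⟩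
          · rintro ⟨j, hkj, hfj⟩
            rcases Nat.lt_or_ge (k + 1) j with hlt | hge
            · exact ⟨j, hlt, hfj⟩
            · have hj1 : j = k + 1 := by omega
              rw [hj1] at hfj
              exact absurd hfj hnotgt
-- ===== VERDICT (by name: the statement is the Claim_ definition above) =====
-- loose ends used only by the final assembly
lemma af_fireless_of_pre (n m : Int) (arr : List (List Int)) (hn0 : 0 ≤ n)
    (hfl : ∀ i : Nat, i < n.toNat → ∀ j : Nat, j < m.toNat →
      PySem.List.pyGetD (PySem.List.pyGetD arr (i : Int) []) (j : Int) 0 ≠ 1) :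
    ∀ c, ¬ afSrc n m arr c := by
  rintro c ⟨⟨h1, h2, h3, h4⟩, hget⟩
  have hi : (c.1.toNat : Int) = c.1 := Int.toNat_of_nonneg h1
  have hj : (c.2.toNat : Int) = c.2 := Int.toNat_of_nonneg h3
  refine hfl c.1.toNat (by omega) c.2.toNat (by omega) ?_
  unfold afGet at hget
  rw [hi, hj]
  exact hget

theorem avoidFire_spec : Claim_equal_avoidFire := by
  classical
  unfold Claim_equal_avoidFire
  intro n m x y arr _ hpre
  unfold Spec_avoidFire
  have hq_iff : (afInit n m arr).1 = [] ↔ ∀ c, ¬ afSrc n m arr c := by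
    rw [List.eq_nil_iff_forall_not_mem]
    constructor
    · intro h c hc
      exact h c ((afInit_mem n m arr c).mpr hc)
    · intro h c hc
      exact h c ((afInit_mem n m arr c).mp hc)
  have hset_iff : (abFireSet n m arr).isEmpty = true ↔ ∀ c, ¬ afSrc n m arr c := by
    rw [List.isEmpty_iff, List.eq_nil_iff_forall_not_mem]
    constructor
    · intro h c hc
      exact h c ((abFireSet_mem n m arr c).mpr hc)
    · intro h c hc
      exact h c ((abFireSet_mem n m arr c).mp hc)
  simp only [avoidFire, avoidFire_alt]
  rcases hpre with htriv | ⟨hnpos, hmpos, hnmE, _, _, hdisj⟩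
  · have hnofire : ∀ c, ¬ afSrc n m arr c := by
      rintro c ⟨⟨h1, h2, h3, h4⟩, _⟩
      rcases htriv with h | h <;> omega
    rw [if_pos (hq_iff.mpr hnofire), if_pos (hset_iff.mpr hnofire)]
  have hn0 : 0 ≤ n := le_of_lt hnpos
  have hm0 : 0 ≤ m := le_of_lt hmpos
  by_cases hfire : ∀ c, ¬ afSrc n m arr c
  · rw [if_pos (hq_iff.mpr hfire), if_pos (hset_iff.mpr hfire)]
  · rw [if_neg (fun hx => hfire (hq_iff.mp hx)), if_neg (fun hx => hfire (hset_iff.mp hx))]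
    rw [not_forall] at hfire
    obtain ⟨c0, hc0⟩ := hfire
    rw [not_not] at hc0
    have hnm1 : 1 ≤ n.toNat * m.toNat := by
      obtain ⟨⟨a1, a2, a3, a4⟩, _⟩ := hc0
      have h1 : 1 ≤ n.toNat := by omega
      have h2 : 1 ≤ m.toNat := by omega
      calc 1 = 1 * 1 := by norm_num
        _ ≤ n.toNat * m.toNat := Nat.mul_le_mul h1 h2
    have hxy : afInb n m (x, y) := by
      rcases hdisj with hfl | hin
      · exact absurd hc0 (af_fireless_of_pre n m arr hn0 hfl c0)
      · exact ⟨hin.1, hin.2.1, hin.2.2.1, hin.2.2.2⟩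
    -- the fire BFS computes capped fire-arrival times
    have hInit1 : ∀ c, 0 ≤ (afInit n m arr).2 c ∧ (afInit n m arr).2 c ≤ 1000000000 := by
      intro c
      by_cases hcs : afSrc n m arr c
      · rw [(afInit_g n m arr c).1 hcs]
        norm_num
      · rw [(afInit_g n m arr c).2 hcs]
        norm_num
    have hInv2 : afInv2 n m arr (afInit n m arr).2 := by
      refine ⟨hInit1, fun c hc => (afInit_g n m arr c).1 hc, fun c => ?_⟩
      by_cases hcs : afSrc n m arr c
      · right
        rw [(afInit_g n m arr c).1 hcs]
        exact hcs
      · left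
        exact (afInit_g n m arr c).2 hcs
    have hFireInv : afFireInv n m arr (afInit n m arr).1 (afInit n m arr).2 := by
      refine ⟨hInv2, fun a ha => ?_⟩
      by_cases has : afSrc n m arr a
      · exact Or.inl ((afInit_mem n m arr a).mpr has)
      · right
        intro b hab hb
        have h1 := (hInit1 b).2
        rw [(afInit_g n m arr a).2 has]
        omega
    have hphi_bound : ∀ g : (Int × Int) → Int, (∀ c, 0 ≤ g c ∧ g c ≤ 1000000000) →
        afPhi n m g ≤ 2 * (n.toNat * m.toNat * 1000000000) := by
      intro g hg
      unfold afPhi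
      have hsum : ∑ c ∈ (Finset.Ico (0 : Int) n ×ˢ Finset.Ico (0 : Int) m), (g c).toNat ≤
          ∑ _c ∈ (Finset.Ico (0 : Int) n ×ˢ Finset.Ico (0 : Int) m), 1000000000 := by
        apply Finset.sum_le_sum
        intro c _
        have := (hg c).2
        omega
      rw [Finset.sum_const, smul_eq_mul, Finset.card_product, Int.card_Ico, Int.card_Ico] at hsum
      simp only [sub_zero] at hsum
      omega
    have hmu1 : afPhi n m (afInit n m arr).2 + (afInit n m arr).1.length <
        2000000001 * (n.toNat * m.toNat) + 1 := by
      have h1 := hphi_bound _ hInit1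
      have h2 := afInit_len n m arr
      omega
    obtain ⟨hg2, hgst⟩ := afFireLoop_spec n m arr (2000000001 * (n.toNat * m.toNat) + 1)
      (afInit n m arr).1 (afInit n m arr).2 hFireInv hmu1
    have hgood := afGoodFire_of n m arr _ hg2 hgst
    set g' := afFireLoop n m (2000000001 * (n.toNat * m.toNat) + 1)
      (afInit n m arr).1 (afInit n m arr).2 with hg'def
    set h0 := Function.update (fun _ : Int × Int => (1000000000 : Int)) (x, y) 0 with hh0def
    have hh0c : ∀ c, 0 ≤ h0 c ∧ h0 c ≤ 1000000000 := by
      intro c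
      by_cases hc : c = (x, y)
      · rw [hc, hh0def, Function.update_self]
        norm_num
      · rw [hh0def, Function.update_of_ne hc]
        norm_num
    have hDistInv : afDistInv n m x y arr g' [(x, y)] h0 := by
      refine ⟨hh0c, fun c => ?_, fun a ha => ?_⟩
      · by_cases hc : c = (x, y)
        · right
          rw [hc, hh0def, Function.update_self]
          exact rfl
        · left
          rw [hh0def, Function.update_of_ne hc]
      · by_cases hc : a = (x, y)
        · exact Or.inl (by rw [hc]; exact List.mem_cons_self)
        · right
          right
          intro b hab hb
          left
          have h1 := (hh0c b).2
          rw [hh0def, Function.update_of_ne hc]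
          have : h0 b ≤ 1000000000 := (hh0c b).2
          rw [hh0def] at this
          omega
    have hmu2 : afPhi n m h0 + ([(x, y)] : List (Int × Int)).length <
        2000000001 * (n.toNat * m.toNat) + 1 := by
      have h1 := hphi_bound _ hh0c
      simp only [List.length_cons, List.length_nil]
      omega
    obtain ⟨t1, t2, t3, t4⟩ := afDistLoop_spec n m x y arr g' hgood
      (2000000001 * (n.toNat * m.toNat) + 1) [(x, y)] h0 hDistInv hmu2
    set h' := afDistLoop n m g' (2000000001 * (n.toNat * m.toNat) + 1) [(x, y)] h0 with hh'def
    have hstart0 : h' (x, y) ≤ 0 := by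
      have ht := t1 (x, y)
      rw [hh0def, Function.update_self] at ht
      exact ht
    by_cases htgt : ((x, y) : Int × Int) = (n - 1, m - 1)
    · rw [if_pos htgt]
      have hA : ¬ h' (n - 1, m - 1) = 1000000000 := by
        rw [← htgt]
        have h1 := (t2 (x, y)).1
        omega
      rw [if_neg hA]
    · rw [if_neg htgt]
      by_cases hsb : afSrc n m arr (x, y)
      · rw [if_pos ((PySem.Set.contains_iff _ _).mpr ((abFireSet_mem n m arr (x, y)).mpr hsb))]
        have hAE : h' (n - 1, m - 1) = 1000000000 := by
          rcases t3 (n - 1, m - 1) with hE | hR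
          · exact hE
          · exact absurd (afReach_start_burned n m x y arr hsb hR).symm htgt
        rw [if_pos hAE]
      · rw [if_neg (fun hcont => hsb ((abFireSet_mem n m arr (x, y)).mp
          ((PySem.Set.contains_iff _ _).mp hcont)))]
        have hs0 : ¬ afF n m arr 0 (x, y) := hsb
        have hsingleton : PySem.Set.add PySem.Set.empty ((x, y) : Int × Int) = [(x, y)] := rfl
        have hfr0 : ∀ c, c ∈ PySem.Set.add PySem.Set.empty ((x, y) : Int × Int) ↔
            afFrontier n m x y arr 0 c := by
          intro c
          rw [hsingleton, List.mem_singleton, afFrontier_zero]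
          constructor
          · intro hc
            exact ⟨hc, hs0⟩
          · intro hc
            exact hc.1
        have hvis0 : ∀ c, c ∈ PySem.Set.add PySem.Set.empty ((x, y) : Int × Int) ↔
            afVisited n m x y arr 0 c := by
          intro c
          rw [hsingleton, List.mem_singleton, afVisited_zero]
        have hb0 : ∀ c, c ∈ abFireSet n m arr ↔ afF n m arr 0 c := fun c =>
          abFireSet_mem n m arr c
        have hff0 : ∀ c, c ∈ abFireSet n m arr ↔ afFFront n m arr 0 c := by
          intro c
          rw [abFireSet_mem n m arr c]
          constructor
          · intro hc
            exact ⟨hc, fun j hj => absurd hj (Nat.not_lt_zero j)⟩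
          · intro hc
            exact hc.1
        obtain ⟨hiff, hdisj2⟩ := abLoop_spec n m x y arr (n.toNat * m.toNat + 2) 0
          (abFireSet n m arr) (abFireSet n m arr)
          (PySem.Set.add PySem.Set.empty (x, y)) (PySem.Set.add PySem.Set.empty (x, y))
          hb0 (abFireSet_nodup n m arr) hff0 hfr0 hvis0
          (by rw [hsingleton]; exact List.nodup_singleton _)
          (by
            intro c hc
            rw [hsingleton, List.mem_singleton] at hc
            rw [hc]
            exact hxy)
          (by rw [hsingleton]; simp)
          (by omega)
        by_cases hA : h' (n - 1, m - 1) = 1000000000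
        · rw [if_pos hA]
          rcases hdisj2 with hB0 | hB1
          · rw [hB0]
          · exfalso
            rcases hiff.mp hB1 with ⟨j, _, hfj⟩
            have hreach := afFrontier_reach n m x y arr hfj
            have hjlt := afFrontier_card n m x y arr hxy hfj
            have hjE : (j : Int) < 1000000000 := by
              have hc1 : ((n.toNat * m.toNat : Nat) : Int) = n * m := by
                push_cast
                rw [Int.toNat_of_nonneg hn0, Int.toNat_of_nonneg hm0]
              have hc2 : (j : Int) < ((n.toNat * m.toNat : Nat) : Int) := by
                exact_mod_cast hjlt
              omega
            have hcomp := afDist_complete n m x y arr g' h' hgood hstart0 t4 hxy j hjE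
              (n - 1, m - 1) hreach
            omega
        · rw [if_neg hA]
          rcases t3 (n - 1, m - 1) with hE | hR
          · exact absurd hE hA
          rcases afReach_frontier n m x y arr hs0 hR with ⟨j, _, hfj⟩
          have hj0 : 0 < j := by
            rcases Nat.eq_zero_or_pos j with rfl | hpos
            · exact absurd (afFrontier_start hfj).symm htgt
            · exact hpos
          rw [hiff.mpr ⟨j, hj0, hfj⟩]
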